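-- pv_equiv track=rewrite | github.com/katarzynaadamczyk/AoC | Day_20/task1.py | imageenhacement
-- ===== SOURCE A (Python) =====
-- def imageenhacement(image, decodedata):
--     # copying the image
--     newimage = []
--     for i in range(len(image)):
--         tmp = []
--         for j in range(len(image[i])):
--             tmp.append(image[i][j])
--         newimage.append(tmp)
--
--     # working with the image enhacement algorithm
--     for i in range(1, len(image) - 1):
--         for j in range(1, len(image[i]) - 1):
--             binarynum = ''
--             for y in range(i-1, i + 2):
--                 for x in range(j - 1, j + 2):
--                     binarynum += image[y][x]
--             newimage[i][j] = '1' if decodedata[int(binarynum, 2)] == '#' else '0'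
--
--     if decodedata[0] == '#':
--         for i in range(len(newimage[0])):
--             if newimage[0][i] == '0':
--                 newimage[0][i] = '1'
--             else:
--                 newimage[0][i] = '0'
--             if newimage[-1][i] == '0':
--                 newimage[-1][i] = '1'
--             else:
--                 newimage[-1][i] = '0'
--         for i in range(1, len(newimage) - 1):
--             if newimage[i][0] == '0':
--                 newimage[i][0] = '1'
--             else:
--                 newimage[i][0] = '0'
--             if newimage[i][-1] == '0':
--                 newimage[i][-1] = '1'
--             else:
--                 newimage[i][-1] = '0'
--
--
--     return newimage
-- ===== SOURCE B (Python) =====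
-- def imageenhacement(image, decodedata):
--     # row-triple sliding window: each interior row is produced from its (up, row, dn)
--     # triple with three rolling 3-bit column windows, so the 9-bit decode index is
--     # updated incrementally instead of gathered cell by cell; border cells are
--     # flipped (or kept) inline.
--     rows = len(image)
--     flip = decodedata[0] == '#'
--
--     def edge(c):
--         return ('1' if c == '0' else '0') if flip else c
--
--     out = []
--     for i in range(rows):
--         row = image[i]
--         cols = len(row)
--         if not (1 <= i <= rows - 2) or cols < 3:
--             out.append([edge(c) for c in row])
--             continue
--         up, dn = image[i - 1], image[i + 1]
--         a = 2 * (up[0] == '1') + (up[1] == '1')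
--         b = 2 * (row[0] == '1') + (row[1] == '1')
--         c = 2 * (dn[0] == '1') + (dn[1] == '1')
--         new = [edge(row[0])]
--         for j in range(1, cols - 1):
--             a = (a * 2 + (up[j + 1] == '1')) % 8
--             b = (b * 2 + (row[j + 1] == '1')) % 8
--             c = (c * 2 + (dn[j + 1] == '1')) % 8
--             new.append('1' if decodedata[a * 64 + b * 8 + c] == '#' else '0')
--         new.append(edge(row[-1]))
--         out.append(new)
--     return out
-- ===== Notes on version B (the rewrite author's own statement) =====
-- stated objective: alternative
-- what changed: A deep-copies the image, overwrites interior cells in place by concatenating the nine neighborhood cells into a binary string parsed with int(.,2), then runs two further mutation loops flipping the border rows/columns; B streams over row triples (up,row,dn) keeping three rolling 3-bit column windows per row, so each 9-bit decode index is updated incrementally (shift, add bit, mod 8) instead of gathered per cell, and border cells are flipped inline while each output row is built fresh.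
-- intended difference: On images with exactly one row (or exactly one column and at least three rows) whose decode string starts with '#', A's paired [0]/[-1] border writes hit the same cell twice and return those pixels un-inverted, while B inverts every border pixel exactly once, which is the intended background flip of the enhancement step. — e.g. on imageenhacement([["0"]], "#"): A returns [["0"]], B returns [["1"]]
-- outside the precondition, e.g. on imageenhacement([['0'], ['1', '1']], '#'): A returns [['1'], ['0', '1']], B returns [['1'], ['0', '0']]
import Mathlib
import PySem

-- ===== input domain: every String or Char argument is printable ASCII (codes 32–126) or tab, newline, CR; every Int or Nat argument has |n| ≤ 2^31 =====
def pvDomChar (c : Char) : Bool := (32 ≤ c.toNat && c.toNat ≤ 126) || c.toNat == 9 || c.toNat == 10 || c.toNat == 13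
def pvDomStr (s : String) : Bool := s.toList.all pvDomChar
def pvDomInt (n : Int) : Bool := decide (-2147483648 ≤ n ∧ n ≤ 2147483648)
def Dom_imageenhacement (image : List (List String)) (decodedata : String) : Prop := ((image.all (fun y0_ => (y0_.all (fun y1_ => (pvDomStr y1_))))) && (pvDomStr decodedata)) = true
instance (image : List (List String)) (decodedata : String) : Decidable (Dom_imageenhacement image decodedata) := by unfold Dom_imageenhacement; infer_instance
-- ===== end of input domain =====

-- B streams over row triples with three rolling 3-bit column windows (incremental decode
-- index) instead of A's deep copy + per-cell binary-string gather + two border-flip passes;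
-- outside D_ below the return values agree.

-- ===== PORT A =====
-- shared 2D indexing helpers: Python's m[i][j] read and 'm[i][j] = v' write
def cellGet (m : List (List String)) (i j : Int) : String :=
  PySem.List.pyGetD (PySem.List.pyGetD m i []) j ""
def cellSet (m : List (List String)) (i j : Int) (v : String) : List (List String) :=
  PySem.List.pySetD m i (PySem.List.pySetD (PySem.List.pyGetD m i []) j v)

-- the interior-loop body: binarynum built over the 3x3 neighbourhood, int(binarynum, 2),
-- then decodedata[...]; ofStrBase? none (ValueError) and an out-of-range index are
-- excluded by Pre_, so the .getD defaults are never hit there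
def enhCell (image : List (List String)) (decodedata : String) (i j : Int) : String :=
  let binarynum :=
    (PySem.List.pyRange (i - 1) (i + 2)).foldl (fun b y =>
      (PySem.List.pyRange (j - 1) (j + 2)).foldl (fun b x =>
        b ++ cellGet image y x) b) ""
  if PySem.Str.pyGet? decodedata ((PySem.Int.ofStrBase? binarynum 2).getD 0) = some '#'
  then "1" else "0"

def imageenhacement (image : List (List String)) (decodedata : String) : List (List String) :=
  -- copying the image
  let newimage :=
    (PySem.List.pyRange 0 (PySem.List.len image)).foldl (fun newimage i =>
      let tmp :=
        (PySem.List.pyRange 0 (PySem.List.len (PySem.List.pyGetD image i []))).foldl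
          (fun tmp j => tmp ++ [cellGet image i j]) []
      newimage ++ [tmp]) []
  -- working with the image enhacement algorithm
  let newimage :=
    (PySem.List.pyRange 1 (PySem.List.len image - 1)).foldl (fun ni i =>
      (PySem.List.pyRange 1 (PySem.List.len (PySem.List.pyGetD image i []) - 1)).foldl (fun ni j =>
        cellSet ni i j (enhCell image decodedata i j)) ni) newimage
  if PySem.Str.pyGet? decodedata 0 = some '#' then
    let newimage :=
      (PySem.List.pyRange 0 (PySem.List.len (PySem.List.pyGetD newimage 0 []))).foldl (fun ni i =>
        let ni := if cellGet ni 0 i = "0" then cellSet ni 0 i "1" else cellSet ni 0 i "0"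
        if cellGet ni (-1) i = "0" then cellSet ni (-1) i "1" else cellSet ni (-1) i "0") newimage
    (PySem.List.pyRange 1 (PySem.List.len newimage - 1)).foldl (fun ni i =>
      let ni := if cellGet ni i 0 = "0" then cellSet ni i 0 "1" else cellSet ni i 0 "0"
      if cellGet ni i (-1) = "0" then cellSet ni i (-1) "1" else cellSet ni i (-1) "0") newimage
  else newimage

-- ===== PORT B =====
def bitB (s : String) : Int := if s = "1" then 1 else 0

def edgeB (flip : Bool) (c : String) : String :=
  if flip then (if c = "0" then "1" else "0") else c

-- the rolling-window loop body: shift each of the three 3-bit column windows by one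
-- column (mod 8) and decode the combined 9-bit index
def rollStep (decodedata : String) (up row dn : List String)
    (st : Int × Int × Int × List String) (j : Int) : Int × Int × Int × List String :=
  let a := PySem.Int.mod (st.1 * 2 + bitB (PySem.List.pyGetD up (j + 1) "")) 8
  let b := PySem.Int.mod (st.2.1 * 2 + bitB (PySem.List.pyGetD row (j + 1) "")) 8
  let c := PySem.Int.mod (st.2.2.1 * 2 + bitB (PySem.List.pyGetD dn (j + 1) "")) 8
  (a, b, c, st.2.2.2 ++
    [if PySem.Str.pyGet? decodedata (a * 64 + b * 8 + c) = some '#' then "1" else "0"])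

def imageenhacement_alt (image : List (List String)) (decodedata : String) : List (List String) :=
  let rows : Int := PySem.List.len image
  let flip : Bool := PySem.Str.pyGet? decodedata 0 == some '#'
  (PySem.List.pyRange 0 rows).foldl (fun out i =>
    out ++ [
      let row := PySem.List.pyGetD image i []
      let cols : Int := PySem.List.len row
      if ¬ (1 ≤ i ∧ i ≤ rows - 2) ∨ cols < 3 then
        row.map (edgeB flip)
      else
        let up := PySem.List.pyGetD image (i - 1) []
        let dn := PySem.List.pyGetD image (i + 1) []
        let st := (PySem.List.pyRange 1 (cols - 1)).foldl (rollStep decodedata up row dn)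
          (2 * bitB (PySem.List.pyGetD up 0 "") + bitB (PySem.List.pyGetD up 1 ""),
           2 * bitB (PySem.List.pyGetD row 0 "") + bitB (PySem.List.pyGetD row 1 ""),
           2 * bitB (PySem.List.pyGetD dn 0 "") + bitB (PySem.List.pyGetD dn 1 ""),
           [edgeB flip (PySem.List.pyGetD row 0 "")])
        st.2.2.2 ++ [edgeB flip (PySem.List.pyGetD row (-1) "")]]) []

-- ===== PRECONDITION & SPEC =====
-- Pre_ restricts to the natural domain of the task: a grid of '0'/'1' pixels with a full
-- 512-entry decode string wherever a 3x3 interior exists, and a rectangular grid when the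
-- background flip fires.  Outside it A raises (empty decode string, ragged rows breaking
-- the [-1] flip writes, a decode string shorter than a reachable index) or returns values
-- on malformed non-grid input (non-binary cells parsed as one binary numeral, ragged rows
-- flipped only where the first row reaches) that are accidents of its string-parsing and
-- index patterns; see claim.json "cites" for excluded inputs on which A still returns.
def Pre_imageenhacement (image : List (List String)) (decodedata : String) : Prop :=
  decodedata.toList ≠ [] ∧
  ((3 ≤ image.length ∧ ∃ row ∈ (image.drop 1).dropLast, 3 ≤ row.length) →
    ((∀ row ∈ image, ∀ c ∈ row, c = "0" ∨ c = "1") ∧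
     (∀ row ∈ image, row.length = (image.headD []).length) ∧
     512 ≤ decodedata.toList.length)) ∧
  (decodedata.toList.headD ' ' = '#' →
    (image ≠ [] ∧ (∀ row ∈ image, row.length = (image.headD []).length) ∧
     (3 ≤ image.length → 1 ≤ (image.headD []).length)))
instance (image : List (List String)) (decodedata : String) : Decidable (Pre_imageenhacement image decodedata) := by
  unfold Pre_imageenhacement; infer_instance

def pvWitness_imageenhacement : List (List String) × String := ([["0", "1"], ["1", "0"]], "#.")

-- On images with exactly one row, or exactly one column and at least three rows, whose decode
-- string starts with '#', A's paired [0]/[-1] border writes hit the same cell twice and leave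
-- those pixels un-inverted, while B inverts every border pixel exactly once, which is the
-- intended background flip of the enhancement step.
def D_imageenhacement (image : List (List String)) (decodedata : String) : Prop :=
  decodedata.toList.headD ' ' = '#' ∧
  ((image.length = 1 ∧ 1 ≤ (image.headD []).length) ∨
   ((image.headD []).length = 1 ∧ 3 ≤ image.length))
instance (image : List (List String)) (decodedata : String) : Decidable (D_imageenhacement image decodedata) := by
  unfold D_imageenhacement; infer_instance

def Spec_imageenhacement (image : List (List String)) (decodedata : String) (out : List (List String)) : Prop :=
  ¬ D_imageenhacement image decodedata → out = imageenhacement_alt image decodedata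
instance (image : List (List String)) (decodedata : String) (out : List (List String)) : Decidable (Spec_imageenhacement image decodedata out) := by
  unfold Spec_imageenhacement; infer_instance

def pvDiffWitness_imageenhacement : List (List String) × String := ([["0"]], "#")
def pvDiffWitnessOut_imageenhacement : (List (List String)) × (List (List String)) := ([["0"]], [["1"]])

-- ===== CLAIM (what is proved, stated in full; the proofs are below) =====
def Claim_unchanged_imageenhacement : Prop := ∀ (image : List (List String)) (decodedata : String), Dom_imageenhacement image decodedata → Pre_imageenhacement image decodedata → Spec_imageenhacement image decodedata (imageenhacement image decodedata)
def Claim_changed_imageenhacement : Prop := Dom_imageenhacement (pvDiffWitness_imageenhacement.1) (pvDiffWitness_imageenhacement.2) ∧ Pre_imageenhacement (pvDiffWitness_imageenhacement.1) (pvDiffWitness_imageenhacement.2) ∧ D_imageenhacement (pvDiffWitness_imageenhacement.1) (pvDiffWitness_imageenhacement.2) ∧ imageenhacement (pvDiffWitness_imageenhacement.1) (pvDiffWitness_imageenhacement.2) = pvDiffWitnessOut_imageenhacement.1 ∧ imageenhacement_alt (pvDiffWitness_imageenhacement.1) (pvDiffWitness_imageenhacement.2) = pvDiffWitnessOut_imageenhacement.2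 ∧ pvDiffWitnessOut_imageenhacement.1 ≠ pvDiffWitnessOut_imageenhacement.2
def Claim_exact_imageenhacement : Prop := ∀ (image : List (List String)) (decodedata : String), Dom_imageenhacement image decodedata → Pre_imageenhacement image decodedata → D_imageenhacement image decodedata → imageenhacement image decodedata ≠ imageenhacement_alt image decodedata

-- ===== LEMMAS AND PROOFS =====

def flipS (s : String) : String := if s = "0" then "1" else "0"

-- getD over set
lemma set_getD {α} (l : List α) (n q : Nat) (a : α) (d : α) :
    (l.set n a).getD q d = if n = q ∧ q < l.length then a else l.getD q d := by
  rcases Decidable.em (n = q ∧ q < l.length) with h | h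
  · obtain ⟨rfl, hq⟩ := h
    simp [List.getD_eq_getElem?_getD, List.getElem?_set_self, hq]
  · simp only [List.getD_eq_getElem?_getD]
    rw [List.getElem?_set]
    by_cases hnq : n = q
    · subst hnq
      have : ¬ n < l.length := fun hlt => h ⟨rfl, hlt⟩
      simp [this]
    · simp [hnq]

lemma pySetD_oob {α} (xs : List α) (i : Int) (v : α) (h : (xs.length : Int) ≤ i) :
    PySem.List.pySetD xs i v = xs := by
  have : PySem.List.pySet? xs i v = none := by
    rw [PySem.List.pySet?_eq_none_iff]
    intro hir
    rcases hir with ⟨-, h2⟩ <;> omega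
  simp [PySem.List.pySetD, this]

-- length preserved by a fold of pySetD row writes
lemma length_foldl_pySetD {α ι} (js : List ι) (idx : ι → Int) (F : List α → ι → α)
    (m : List α) : (js.foldl (fun m j => PySem.List.pySetD m (idx j) (F m j)) m).length = m.length := by
  induction js generalizing m with
  | nil => rfl
  | cons j js ih => rw [List.foldl_cons, ih, PySem.List.length_pySetD]

-- pointwise value of a fold writing f j at column j over range [b,e)
lemma foldl_pySetD_pyRange_getD (r : List String) (b e : Int) (hb : 0 ≤ b) (f : Int → String) (q : Nat) :
    ((PySem.List.pyRange b e).foldl (fun r j => PySem.List.pySetD r j (f j)) r).getD q ""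
    = if b ≤ (q : Int) ∧ (q : Int) < e ∧ q < r.length then f q else r.getD q "" := by
  by_cases hbe : e ≤ b
  · rw [PySem.List.pyRange_one_eq_nil hbe]
    have : ¬ (b ≤ (q : Int) ∧ (q : Int) < e ∧ q < r.length) := by omega
    simp [this]
  · push_neg at hbe
    rw [PySem.List.pyRange_one_cons hbe, List.foldl_cons]
    have h1 : PySem.List.pySetD r b (f b) = r.set b.toNat (f b) := PySem.List.pySetD_of_nonneg _ _ hb
    have := foldl_pySetD_pyRange_getD (r.set b.toNat (f b)) (b+1) e (by omega) f q
    rw [h1, this, List.length_set, set_getD]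
    by_cases c1 : ((b+1 : Int) ≤ (q : Int) ∧ (q : Int) < e ∧ q < r.length)
    · have c2 : (b ≤ (q : Int) ∧ (q : Int) < e ∧ q < r.length) := by omega
      simp [c1, c2]
    · simp only [c1, if_false]
      by_cases c3 : (b.toNat = q ∧ q < r.length)
      · have hq : ((q : Int)) = b := by omega
        by_cases c4 : (b ≤ (q : Int) ∧ (q : Int) < e ∧ q < r.length)
        · rw [hq]
          simp [c3, c4]
          intro h
          exact absurd h (by omega)
        · exact ((c4 ⟨by omega, by omega, c3.2⟩).elim)
      · simp only [c3, if_false]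
        have c5 : ¬ (b ≤ (q : Int) ∧ (q : Int) < e ∧ q < r.length) := by
          rintro ⟨ha, hb2, hc⟩
          exact c3 ⟨by omega, hc⟩
        simp [c5]
termination_by (e - b).toNat
decreasing_by omega

lemma pyGetD_nonneg_getD {α} (xs : List α) (a : Int) (d : α) (h : 0 ≤ a) :
    PySem.List.pyGetD xs a d = xs.getD a.toNat d := by
  by_cases hlt : a.toNat < xs.length
  · rw [PySem.List.pyGetD_eq_getElem xs d h (by omega), List.getD_eq_getElem _ _ hlt]
  · have h1 : PySem.List.pyGet? xs a = none := by
      rw [PySem.List.pyGet?_eq_none_iff]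
      rintro ⟨h1, h2⟩
      omega
    have h2 : xs.getD a.toNat d = d := by
      rw [List.getD_eq_getElem?_getD, List.getElem?_eq_none (by omega)]
      rfl
    rw [h2]
    simp [PySem.List.pyGetD, h1]

lemma foldl_rowset_pyRange_getD (m : List (List String)) (a e : Int) (ha : 0 ≤ a)
    (g : Int → List String → List String) (p : Nat) :
    ((PySem.List.pyRange a e).foldl
        (fun m i => PySem.List.pySetD m i (g i (PySem.List.pyGetD m i []))) m).getD p []
    = if a ≤ (p : Int) ∧ (p : Int) < e ∧ p < m.length then g p (m.getD p []) else m.getD p [] := by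
  by_cases hbe : e ≤ a
  · rw [PySem.List.pyRange_one_eq_nil hbe]
    have : ¬ (a ≤ (p : Int) ∧ (p : Int) < e ∧ p < m.length) := by omega
    simp [this]
  · push_neg at hbe
    rw [PySem.List.pyRange_one_cons hbe, List.foldl_cons]
    have h1 : PySem.List.pySetD m a (g a (PySem.List.pyGetD m a []))
        = m.set a.toNat (g a (m.getD a.toNat [])) := by
      rw [PySem.List.pySetD_of_nonneg _ _ ha, pyGetD_nonneg_getD _ _ _ ha]
    have ih := foldl_rowset_pyRange_getD (m.set a.toNat (g a (m.getD a.toNat []))) (a+1) e (by omega) g p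
    rw [h1, ih, List.length_set, set_getD]
    by_cases c1 : ((a+1 : Int) ≤ (p : Int) ∧ (p : Int) < e ∧ p < m.length)
    · have c2 : (a ≤ (p : Int) ∧ (p : Int) < e ∧ p < m.length) := by omega
      have hne : ¬ a.toNat = p := by omega
      simp [c1, c2, hne]
    · simp only [c1, if_false]
      by_cases c3 : (a.toNat = p ∧ p < m.length)
      · have hq : ((p : Int)) = a := by omega
        have hte : a.toNat = p := c3.1
        by_cases c4 : (a ≤ (p : Int) ∧ (p : Int) < e ∧ p < m.length)
        · rw [hte, hq]
          simp [c3, c3.2]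
          intro h
          exact absurd h (by omega)
        · exact ((c4 ⟨by omega, by omega, c3.2⟩).elim)
      · simp only [c3, if_false]
        have c5 : ¬ (a ≤ (p : Int) ∧ (p : Int) < e ∧ p < m.length) := by
          rintro ⟨h1', h2', h3'⟩
          exact c3 ⟨by omega, h3'⟩
        simp [c5]
termination_by (e - a).toNat
decreasing_by omega

lemma pySetD_pySetD {α} (xs : List α) (i : Int) (v1 v2 : α) (h : 0 ≤ i) :
    PySem.List.pySetD (PySem.List.pySetD xs i v1) i v2 = PySem.List.pySetD xs i v2 := by
  rw [PySem.List.pySetD_of_nonneg _ _ h, PySem.List.pySetD_of_nonneg _ _ h,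
      PySem.List.pySetD_of_nonneg _ _ h, List.set_set]

lemma pyGetD_pySetD_self {α} (xs : List α) (i : Int) (v d : α) (h0 : 0 ≤ i)
    (h : i < (xs.length : Int)) :
    PySem.List.pyGetD (PySem.List.pySetD xs i v) i d = v := by
  rw [PySem.List.pySetD_of_nonneg _ _ h0, pyGetD_nonneg_getD _ _ _ h0, set_getD]
  simp
  omega

lemma foldl_cellSet_fixed_row (js : List Int) (ni : List (List String)) (i : Int) (h0 : 0 ≤ i)
    (hi : i < (ni.length : Int)) (f : Int → String) :
    js.foldl (fun m j => cellSet m i j (f j)) ni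
    = PySem.List.pySetD ni i (js.foldl (fun r j => PySem.List.pySetD r j (f j))
        (PySem.List.pyGetD ni i [])) := by
  induction js generalizing ni with
  | nil =>
    rw [List.foldl_nil, List.foldl_nil, PySem.List.pySetD_of_nonneg _ _ h0,
        pyGetD_nonneg_getD _ _ _ h0, List.getD_eq_getElem _ _ (by omega)]
    exact (List.set_getElem_self (by omega)).symm
  | cons j js ih =>
    rw [List.foldl_cons, List.foldl_cons]
    have hlen : ((cellSet ni i j (f j)).length : Int) = ni.length := by
      unfold cellSet
      rw [PySem.List.length_pySetD]
    rw [ih _ (by omega)]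
    unfold cellSet
    rw [pyGetD_pySetD_self _ _ _ _ h0 hi, pySetD_pySetD _ _ _ _ h0]

lemma copy_phase_eq (image : List (List String)) :
    (PySem.List.pyRange 0 (PySem.List.len image)).foldl (fun newimage i =>
      newimage ++ [(PySem.List.pyRange 0 (PySem.List.len (PySem.List.pyGetD image i []))).foldl
          (fun tmp j => tmp ++ [cellGet image i j]) []]) [] = image := by
  rw [PySem.List.foldl_append_singleton_eq_map
    (fun i => (PySem.List.pyRange 0 (PySem.List.len (PySem.List.pyGetD image i []))).foldl
          (fun tmp j => tmp ++ [cellGet image i j]) [])]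
  simp only [List.nil_append]
  have h : ∀ i : Int, (PySem.List.pyRange 0 (PySem.List.len (PySem.List.pyGetD image i []))).foldl
      (fun tmp j => tmp ++ [cellGet image i j]) [] = PySem.List.pyGetD image i [] := by
    intro i
    rw [PySem.List.foldl_append_singleton_eq_map (fun j => cellGet image i j)]
    simp only [List.nil_append]
    exact PySem.List.map_pyGetD_pyRange_zero _ _
  calc (PySem.List.pyRange 0 (PySem.List.len image)).map _
      = (PySem.List.pyRange 0 (PySem.List.len image)).map (fun i => PySem.List.pyGetD image i []) := by
        exact List.map_congr_left (fun i _ => h i)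
    _ = image := PySem.List.map_pyGetD_pyRange_zero _ _

lemma pySetD_neg_one {α} (xs : List α) (v : α) (h : xs ≠ []) :
    PySem.List.pySetD xs (-1) v = xs.set (xs.length - 1) v := by
  have hl : 1 ≤ xs.length := List.length_pos_iff.mpr h
  simp only [PySem.List.pySetD, PySem.List.pySet?, PySem.List.pyIdx?]
  norm_num
  rw [if_pos (by omega)]
  simp

lemma pyGetD_neg_one_getD {α} (xs : List α) (d : α) (h : xs ≠ []) :
    PySem.List.pyGetD xs (-1) d = xs.getD (xs.length - 1) d := by
  have hl : 1 ≤ xs.length := List.length_pos_iff.mpr h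
  rw [PySem.List.pyGetD_neg_one _ _ h, List.getLast_eq_getElem, List.getD_eq_getElem _ _ (by omega)]

-- normalized forms of the shared 2D helpers
lemma cellGet_nonneg (m : List (List String)) (i j : Int) (hi : 0 ≤ i) (hj : 0 ≤ j) :
    cellGet m i j = (m.getD i.toNat []).getD j.toNat "" := by
  unfold cellGet
  rw [pyGetD_nonneg_getD _ _ _ hi, pyGetD_nonneg_getD _ _ _ hj]

lemma cellSet_nonneg (m : List (List String)) (i j : Int) (v : String) (hi : 0 ≤ i) (hj : 0 ≤ j) :
    cellSet m i j v = m.set i.toNat ((m.getD i.toNat []).set j.toNat v) := by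
  unfold cellSet
  rw [PySem.List.pySetD_of_nonneg _ _ hi, pyGetD_nonneg_getD _ _ _ hi,
      PySem.List.pySetD_of_nonneg _ _ hj]

lemma cellGet_neg_one (m : List (List String)) (j : Int) (hj : 0 ≤ j) (h : m ≠ []) :
    cellGet m (-1) j = (m.getD (m.length - 1) []).getD j.toNat "" := by
  unfold cellGet
  rw [pyGetD_neg_one_getD _ _ h, pyGetD_nonneg_getD _ _ _ hj]

lemma cellSet_neg_one (m : List (List String)) (j : Int) (v : String) (hj : 0 ≤ j) (h : m ≠ []) :
    cellSet m (-1) j v = m.set (m.length - 1) ((m.getD (m.length - 1) []).set j.toNat v) := by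
  unfold cellSet
  rw [pySetD_neg_one _ _ h, pyGetD_neg_one_getD _ _ h, PySem.List.pySetD_of_nonneg _ _ hj]

lemma flip_step (m : List (List String)) (i j : Int) :
    (if cellGet m i j = "0" then cellSet m i j "1" else cellSet m i j "0")
    = cellSet m i j (flipS (cellGet m i j)) := by
  unfold flipS
  split_ifs with h <;> rfl

lemma flipTB (m : List (List String)) (hm : 2 ≤ m.length) (a e : Int) (ha : 0 ≤ a) :
    ((PySem.List.pyRange a e).foldl (fun ni i =>
        cellSet (cellSet ni 0 i (flipS (cellGet ni 0 i))) (-1) i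
          (flipS (cellGet (cellSet ni 0 i (flipS (cellGet ni 0 i))) (-1) i))) m).length = m.length ∧
    (∀ p : Nat, (((PySem.List.pyRange a e).foldl (fun ni i =>
        cellSet (cellSet ni 0 i (flipS (cellGet ni 0 i))) (-1) i
          (flipS (cellGet (cellSet ni 0 i (flipS (cellGet ni 0 i))) (-1) i))) m).getD p []).length
      = (m.getD p []).length) ∧
    (∀ p q : Nat, (((PySem.List.pyRange a e).foldl (fun ni i =>
        cellSet (cellSet ni 0 i (flipS (cellGet ni 0 i))) (-1) i
          (flipS (cellGet (cellSet ni 0 i (flipS (cellGet ni 0 i))) (-1) i))) m).getD p []).getD q ""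
      = if (p = 0 ∨ p = m.length - 1) ∧ a ≤ (q : Int) ∧ (q : Int) < e ∧ q < (m.getD p []).length
        then flipS ((m.getD p []).getD q "") else (m.getD p []).getD q "") := by
  by_cases hbe : e ≤ a
  · rw [PySem.List.pyRange_one_eq_nil hbe]
    refine ⟨rfl, fun p => rfl, fun p q => ?_⟩
    have : ¬ ((p = 0 ∨ p = m.length - 1) ∧ a ≤ (q : Int) ∧ (q : Int) < e ∧ q < (m.getD p []).length) := by
      rintro ⟨-, h1, h2, -⟩; omega
    rw [if_neg this]
    rfl
  · push_neg at hbe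
    rw [PySem.List.pyRange_one_cons hbe, List.foldl_cons]
    have hne : m ≠ [] := by intro h; rw [h] at hm; simp at hm
    have e1 : cellSet m 0 a (flipS (cellGet m 0 a))
        = m.set 0 ((m.getD 0 []).set a.toNat (flipS ((m.getD 0 []).getD a.toNat ""))) := by
      rw [cellGet_nonneg _ _ _ (le_refl 0) ha, cellSet_nonneg _ _ _ _ (le_refl 0) ha]
      norm_num
    set r0 := m.getD 0 [] with hr0
    set rL := m.getD (m.length - 1) [] with hrL
    set n1 := m.set 0 (r0.set a.toNat (flipS (r0.getD a.toNat ""))) with hn1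
    have hn1len : n1.length = m.length := by rw [hn1, List.length_set]
    have hn1ne : n1 ≠ [] := List.ne_nil_of_length_pos (by rw [hn1len]; omega)
    have e2 : n1.getD (n1.length - 1) [] = rL := by
      rw [hn1len, hn1, set_getD]
      have : ¬ (0 = m.length - 1 ∧ m.length - 1 < m.length) := by omega
      simp [this, hrL]
      intro h1
      exact absurd h1 (by omega)
    have e3 : cellGet n1 (-1) a = rL.getD a.toNat "" := by
      rw [cellGet_neg_one _ _ ha hn1ne, e2]
    have e4 : cellSet n1 (-1) a (flipS (cellGet n1 (-1) a))
        = n1.set (m.length - 1) (rL.set a.toNat (flipS (rL.getD a.toNat ""))) := by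
      rw [cellSet_neg_one _ _ _ ha hn1ne, e3, e2, hn1len]
    rw [e1, e4]
    set m' := n1.set (m.length - 1) (rL.set a.toNat (flipS (rL.getD a.toNat ""))) with hm'
    have hm'len : m'.length = m.length := by rw [hm', List.length_set, hn1len]
    have hrow : ∀ p : Nat, m'.getD p []
        = if p = m.length - 1 then rL.set a.toNat (flipS (rL.getD a.toNat ""))
          else if p = 0 then r0.set a.toNat (flipS (r0.getD a.toNat ""))
          else m.getD p [] := by
      intro p
      rw [hm', set_getD, hn1len, hn1, set_getD]
      split_ifs with h1 h2 h3 h4 h5 <;> first | rfl | omega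
    have hrowlen : ∀ p : Nat, (m'.getD p []).length = (m.getD p []).length := by
      intro p
      rw [hrow p]
      split_ifs with h1 h2
      · rw [h1, List.length_set, hrL]
      · rw [h2, List.length_set, hr0]
      · rfl
    obtain ⟨ih1, ih2, ih3⟩ := flipTB m' (by omega) (a + 1) e (by omega)
    refine ⟨by rw [ih1, hm'len], fun p => by rw [ih2 p, hrowlen p], fun p q => ?_⟩
    rw [ih3 p q, hm'len, hrowlen p, hrow p]
    by_cases hp : p = 0 ∨ p = m.length - 1
    · have hpL : p < m.length := by omega
      by_cases hq1 : (q : Int) = a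
      · have hqa : a.toNat = q := by omega
        by_cases hqw : q < (m.getD p []).length
        · have hc1 : ¬ ((p = 0 ∨ p = m.length - 1) ∧ a + 1 ≤ (q:Int) ∧ (q:Int) < e ∧ q < (m.getD p []).length) := by
            rintro ⟨-, h1, -, -⟩; omega
          have hc2 : ((p = 0 ∨ p = m.length - 1) ∧ a ≤ (q:Int) ∧ (q:Int) < e ∧ q < (m.getD p []).length) := by
            exact ⟨hp, by omega, by omega, hqw⟩
          rw [if_neg hc1, if_pos hc2]
          rcases hp with hp0 | hpL'
          · have hne' : ¬ p = m.length - 1 := by omega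
            rw [if_neg hne', if_pos hp0, set_getD, hp0, ← hr0]
            have : (a.toNat = q ∧ q < r0.length) := ⟨hqa, by rw [hr0, ← hp0]; exact hqw⟩
            rw [if_pos this, hqa]
          · rw [if_pos hpL', set_getD, hpL', ← hrL]
            have : (a.toNat = q ∧ q < rL.length) := ⟨hqa, by rw [hrL, ← hpL']; exact hqw⟩
            rw [if_pos this, hqa]
        · have hc1 : ¬ ((p = 0 ∨ p = m.length - 1) ∧ a + 1 ≤ (q:Int) ∧ (q:Int) < e ∧ q < (m.getD p []).length) := by
            rintro ⟨-, -, -, h⟩; exact hqw h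
          have hc2 : ¬ ((p = 0 ∨ p = m.length - 1) ∧ a ≤ (q:Int) ∧ (q:Int) < e ∧ q < (m.getD p []).length) := by
            rintro ⟨-, -, -, h⟩; exact hqw h
          rw [if_neg hc1, if_neg hc2]
          rcases hp with hp0 | hpL'
          · have hne' : ¬ p = m.length - 1 := by omega
            rw [if_neg hne', if_pos hp0, set_getD, hp0, ← hr0]
            have : ¬ (a.toNat = q ∧ q < r0.length) := by
              rintro ⟨-, h⟩
              rw [hr0, ← hp0] at h
              exact hqw h
            rw [if_neg this]
          · rw [if_pos hpL', set_getD, hpL', ← hrL]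
            have : ¬ (a.toNat = q ∧ q < rL.length) := by
              rintro ⟨-, h⟩
              rw [hrL, ← hpL'] at h
              exact hqw h
            rw [if_neg this]
      · have hval : (if p = m.length - 1 then rL.set a.toNat (flipS (rL.getD a.toNat ""))
              else if p = 0 then r0.set a.toNat (flipS (r0.getD a.toNat ""))
              else m.getD p []).getD q "" = (m.getD p []).getD q "" := by
          split_ifs with h1 h2
          · rw [set_getD]
            have : ¬ (a.toNat = q ∧ q < rL.length) := by rintro ⟨h, -⟩; omega
            rw [if_neg this, h1, hrL]
          · rw [set_getD]
            have : ¬ (a.toNat = q ∧ q < r0.length) := by rintro ⟨h, -⟩; omega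
            rw [if_neg this, h2, hr0]
          · rfl
        rw [hval]
        have hiff : ((p = 0 ∨ p = m.length - 1) ∧ a + 1 ≤ (q:Int) ∧ (q:Int) < e ∧ q < (m.getD p []).length)
            ↔ ((p = 0 ∨ p = m.length - 1) ∧ a ≤ (q:Int) ∧ (q:Int) < e ∧ q < (m.getD p []).length) := by
          constructor
          · rintro ⟨h1, h2, h3, h4⟩; exact ⟨h1, by omega, h3, h4⟩
          · rintro ⟨h1, h2, h3, h4⟩; exact ⟨h1, by omega, h3, h4⟩
        rw [if_congr hiff rfl rfl]
    · have hval : (if p = m.length - 1 then rL.set a.toNat (flipS (rL.getD a.toNat ""))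
            else if p = 0 then r0.set a.toNat (flipS (r0.getD a.toNat ""))
            else m.getD p []).getD q "" = (m.getD p []).getD q "" := by
        have h1 : ¬ p = m.length - 1 := fun h => hp (Or.inr h)
        have h2 : ¬ p = 0 := fun h => hp (Or.inl h)
        rw [if_neg h1, if_neg h2]
      rw [hval]
      have c1 : ¬ ((p = 0 ∨ p = m.length - 1) ∧ a + 1 ≤ (q:Int) ∧ (q:Int) < e ∧ q < (m.getD p []).length) := by
        rintro ⟨h, -⟩; exact hp h
      have c2 : ¬ ((p = 0 ∨ p = m.length - 1) ∧ a ≤ (q:Int) ∧ (q:Int) < e ∧ q < (m.getD p []).length) := by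
        rintro ⟨h, -⟩; exact hp h
      rw [if_neg c1, if_neg c2]
termination_by (e - a).toNat
decreasing_by omega

lemma flipLR (m : List (List String)) (w : Nat) (hw : 2 ≤ w)
    (hrows : ∀ p : Nat, p < m.length → (m.getD p []).length = w) (a e : Int) (ha : 0 ≤ a) :
    ((PySem.List.pyRange a e).foldl (fun ni i =>
        cellSet (cellSet ni i 0 (flipS (cellGet ni i 0))) i (-1)
          (flipS (cellGet (cellSet ni i 0 (flipS (cellGet ni i 0))) i (-1)))) m).length = m.length ∧
    (∀ p : Nat, (((PySem.List.pyRange a e).foldl (fun ni i =>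
        cellSet (cellSet ni i 0 (flipS (cellGet ni i 0))) i (-1)
          (flipS (cellGet (cellSet ni i 0 (flipS (cellGet ni i 0))) i (-1)))) m).getD p []).length
      = (m.getD p []).length) ∧
    (∀ p q : Nat, (((PySem.List.pyRange a e).foldl (fun ni i =>
        cellSet (cellSet ni i 0 (flipS (cellGet ni i 0))) i (-1)
          (flipS (cellGet (cellSet ni i 0 (flipS (cellGet ni i 0))) i (-1)))) m).getD p []).getD q ""
      = if (a ≤ (p : Int) ∧ (p : Int) < e ∧ p < m.length) ∧ (q = 0 ∨ q = w - 1)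
        then flipS ((m.getD p []).getD q "") else (m.getD p []).getD q "") := by
  by_cases hbe : e ≤ a
  · rw [PySem.List.pyRange_one_eq_nil hbe]
    refine ⟨by simp, fun p => by simp, fun p q => ?_⟩
    have : ¬ ((a ≤ (p : Int) ∧ (p : Int) < e ∧ p < m.length) ∧ (q = 0 ∨ q = w - 1)) := by
      rintro ⟨⟨h1, h2, -⟩, -⟩; omega
    simp only [List.foldl_nil]
    rw [if_neg this]
  · push_neg at hbe
    rw [PySem.List.pyRange_one_cons hbe, List.foldl_cons]
    by_cases hain : a.toNat < m.length
    case neg =>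
      have hoob : ∀ (mm : List (List String)) (v : String) (j : Int), mm.length = m.length →
          cellSet mm a j v = mm := by
        intro mm v j hlen
        unfold cellSet
        exact pySetD_oob _ _ _ (by omega)
      rw [hoob m _ _ rfl, hoob m _ _ rfl]
      obtain ⟨ih1, ih2, ih3⟩ := flipLR m w hw hrows (a + 1) e (by omega)
      refine ⟨ih1, ih2, fun p q => ?_⟩
      rw [ih3 p q]
      have hiff : ((a + 1 ≤ (p : Int) ∧ (p : Int) < e ∧ p < m.length) ∧ (q = 0 ∨ q = w - 1))
          ↔ ((a ≤ (p : Int) ∧ (p : Int) < e ∧ p < m.length) ∧ (q = 0 ∨ q = w - 1)) := by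
        constructor
        · rintro ⟨⟨h1, h2, h3⟩, h4⟩; exact ⟨⟨by omega, h2, h3⟩, h4⟩
        · rintro ⟨⟨h1, h2, h3⟩, h4⟩; exact ⟨⟨by omega, h2, h3⟩, h4⟩
      rw [if_congr hiff rfl rfl]
    case pos =>
      have hr : (m.getD a.toNat []).length = w := hrows a.toNat hain
      have hrne : m.getD a.toNat [] ≠ [] := by
        intro h
        rw [h] at hr
        simp at hr
        omega
      have e1 : cellSet m a 0 (flipS (cellGet m a 0))
          = m.set a.toNat ((m.getD a.toNat []).set 0 (flipS ((m.getD a.toNat []).getD 0 ""))) := by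
        rw [cellGet_nonneg _ _ _ ha (le_refl 0), cellSet_nonneg _ _ _ _ ha (le_refl 0)]
        norm_num
      set r := m.getD a.toNat [] with hrdef
      set r1 := r.set 0 (flipS (r.getD 0 "")) with hr1def
      set n1 := m.set a.toNat r1 with hn1def
      have hr1len : r1.length = w := by rw [hr1def, List.length_set, hr]
      have hr1ne : r1 ≠ [] := by
        intro h
        rw [h] at hr1len
        simp at hr1len
        omega
      have hn1len : n1.length = m.length := by rw [hn1def, List.length_set]
      have e2a : PySem.List.pyGetD n1 a [] = r1 := by
        rw [pyGetD_nonneg_getD _ _ _ ha, hn1def, set_getD, if_pos ⟨rfl, hain⟩]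
      have e2 : cellGet n1 a (-1) = r.getD (w - 1) "" := by
        unfold cellGet
        rw [e2a, pyGetD_neg_one_getD _ _ hr1ne, hr1len, hr1def, set_getD]
        have : ¬ (0 = w - 1 ∧ w - 1 < r.length) := by omega
        rw [if_neg this]
      have e3 : cellSet n1 a (-1) (flipS (cellGet n1 a (-1)))
          = m.set a.toNat (r1.set (w - 1) (flipS (r.getD (w - 1) ""))) := by
        unfold cellSet
        rw [e2, e2a, PySem.List.pySetD_of_nonneg _ _ ha, pySetD_neg_one _ _ hr1ne, hr1len,
            hn1def, List.set_set]
      rw [e1, e3]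
      set m' := m.set a.toNat (r1.set (w - 1) (flipS (r.getD (w - 1) ""))) with hm'def
      have hm'len : m'.length = m.length := by rw [hm'def, List.length_set]
      have hrow : ∀ p : Nat, m'.getD p []
          = if a.toNat = p ∧ p < m.length then r1.set (w - 1) (flipS (r.getD (w - 1) ""))
            else m.getD p [] := by
        intro p
        rw [hm'def, set_getD]
      have hrowlen : ∀ p : Nat, (m'.getD p []).length = (m.getD p []).length := by
        intro p
        rw [hrow p]
        split_ifs with h1
        · rw [List.length_set, hr1len, ← h1.1, ← hrdef, hr]
        · rfl
      have hrows' : ∀ p : Nat, p < m'.length → (m'.getD p []).length = w := by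
        intro p hp
        rw [hrowlen p]
        exact hrows p (by omega)
      obtain ⟨ih1, ih2, ih3⟩ := flipLR m' w hw hrows' (a + 1) e (by omega)
      refine ⟨by rw [ih1, hm'len], fun p => by rw [ih2 p, hrowlen p], fun p q => ?_⟩
      rw [ih3 p q, hm'len, hrow p]
      by_cases hpa : a.toNat = p ∧ p < m.length
      · have hc1 : ¬ ((a + 1 ≤ (p : Int) ∧ (p : Int) < e ∧ p < m.length) ∧ (q = 0 ∨ q = w - 1)) := by
          rintro ⟨⟨h1, -, -⟩, -⟩; omega
        rw [if_neg hc1, if_pos hpa, set_getD, hr1len, hr1def, set_getD]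
        by_cases hq : q = 0 ∨ q = w - 1
        · have hc2 : ((a ≤ (p : Int) ∧ (p : Int) < e ∧ p < m.length) ∧ (q = 0 ∨ q = w - 1)) :=
            ⟨⟨by omega, by omega, hpa.2⟩, hq⟩
          rw [if_pos hc2, ← hpa.1, ← hrdef]
          rcases hq with hq0 | hqw
          · have : ¬ (w - 1 = q ∧ q < w) := by omega
            rw [if_neg this, if_pos (by omega : (0 : Nat) = q ∧ q < r.length), hq0]
          · have : (w - 1 = q ∧ q < w) := by omega
            rw [if_pos this, ← hqw]
        · have hc2 : ¬ ((a ≤ (p : Int) ∧ (p : Int) < e ∧ p < m.length) ∧ (q = 0 ∨ q = w - 1)) := by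
            rintro ⟨-, h⟩; exact hq h
          rw [if_neg hc2, ← hpa.1, ← hrdef]
          have h1 : ¬ (w - 1 = q ∧ q < w) := by omega
          have h2 : ¬ ((0 : Nat) = q ∧ q < r.length) := by
            rintro ⟨h, -⟩; exact hq (Or.inl h.symm)
          rw [if_neg h1, if_neg h2]
      · rw [if_neg hpa]
        have hiff : ((a + 1 ≤ (p : Int) ∧ (p : Int) < e ∧ p < m.length) ∧ (q = 0 ∨ q = w - 1))
            ↔ ((a ≤ (p : Int) ∧ (p : Int) < e ∧ p < m.length) ∧ (q = 0 ∨ q = w - 1)) := by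
          constructor
          · rintro ⟨⟨h1, h2, h3⟩, h4⟩; exact ⟨⟨by omega, h2, h3⟩, h4⟩
          · rintro ⟨⟨h1, h2, h3⟩, h4⟩
            have : ¬ (a.toNat = p) := fun h => hpa ⟨h, h3⟩
            exact ⟨⟨by omega, h2, h3⟩, h4⟩
        rw [if_congr hiff rfl rfl]
termination_by (e - a).toNat
decreasing_by all_goals omega

lemma foldl_cellSet_fixed_row_all (js : List Int) (ni : List (List String)) (i : Int) (h0 : 0 ≤ i)
    (f : Int → String) :
    js.foldl (fun m j => cellSet m i j (f j)) ni
    = PySem.List.pySetD ni i (js.foldl (fun r j => PySem.List.pySetD r j (f j))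
        (PySem.List.pyGetD ni i [])) := by
  by_cases hi : i < (ni.length : Int)
  · exact foldl_cellSet_fixed_row js ni i h0 hi f
  · push_neg at hi
    have hnoop : js.foldl (fun m j => cellSet m i j (f j)) ni = ni := by
      induction js with
      | nil => rfl
      | cons j js ih =>
        rw [List.foldl_cons]
        have : cellSet ni i j (f j) = ni := by
          unfold cellSet
          exact pySetD_oob _ _ _ (by omega)
        rw [this, ih]
    rw [hnoop, pySetD_oob _ _ _ (by omega)]

lemma pyRange_three (a : Int) : PySem.List.pyRange (a - 1) (a + 2) = [a - 1, a, a + 1] := by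
  rw [PySem.List.pyRange_one_cons (by omega), PySem.List.pyRange_one_cons (by omega),
      PySem.List.pyRange_one_cons (by omega), PySem.List.pyRange_one_eq_nil (by omega)]
  norm_num

set_option maxHeartbeats 1000000 in
lemma index_eq_bits (b1 b2 b3 b4 b5 b6 b7 b8 b9 : Bool) :
    (PySem.Int.ofCharsBase? [if b1 then '1' else '0', if b2 then '1' else '0',
      if b3 then '1' else '0', if b4 then '1' else '0', if b5 then '1' else '0',
      if b6 then '1' else '0', if b7 then '1' else '0', if b8 then '1' else '0',
      if b9 then '1' else '0'] 2).getD 0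
    = ((((((((0 * 2 + (if b1 then (1:Int) else 0)) * 2 + (if b2 then 1 else 0)) * 2
      + (if b3 then 1 else 0)) * 2 + (if b4 then 1 else 0)) * 2 + (if b5 then 1 else 0)) * 2
      + (if b6 then 1 else 0)) * 2 + (if b7 then 1 else 0)) * 2 + (if b8 then 1 else 0)) * 2
      + (if b9 then 1 else 0) := by
  revert b1 b2 b3 b4 b5 b6 b7 b8 b9
  decide

lemma key_index (c1 c2 c3 c4 c5 c6 c7 c8 c9 : String)
    (h1 : c1 = "0" ∨ c1 = "1") (h2 : c2 = "0" ∨ c2 = "1") (h3 : c3 = "0" ∨ c3 = "1")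
    (h4 : c4 = "0" ∨ c4 = "1") (h5 : c5 = "0" ∨ c5 = "1") (h6 : c6 = "0" ∨ c6 = "1")
    (h7 : c7 = "0" ∨ c7 = "1") (h8 : c8 = "0" ∨ c8 = "1") (h9 : c9 = "0" ∨ c9 = "1") :
    (PySem.Int.ofStrBase? ("" ++ c1 ++ c2 ++ c3 ++ c4 ++ c5 ++ c6 ++ c7 ++ c8 ++ c9) 2).getD 0
    = ((((((((0 * 2 + (if c1 = "1" then (1:Int) else 0)) * 2 + (if c2 = "1" then 1 else 0)) * 2
      + (if c3 = "1" then 1 else 0)) * 2 + (if c4 = "1" then 1 else 0)) * 2 + (if c5 = "1" then 1 else 0)) * 2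
      + (if c6 = "1" then 1 else 0)) * 2 + (if c7 = "1" then 1 else 0)) * 2 + (if c8 = "1" then 1 else 0)) * 2
      + (if c9 = "1" then 1 else 0) := by
  have E : ∀ c : String, c = "0" ∨ c = "1" → c.toList = [if decide (c = "1") then '1' else '0'] := by
    rintro c (rfl | rfl) <;> rfl
  have hP : ∀ c : String, (if c = "1" then (1:Int) else 0) = if decide (c = "1") then 1 else 0 := by
    intro c
    by_cases h : c = "1" <;> simp [h]
  simp only [PySem.Int.ofStrBase?, String.toList_append,
    E c1 h1, E c2 h2, E c3 h3, E c4 h4, E c5 h5, E c6 h6, E c7 h7, E c8 h8, E c9 h9,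
    hP, String.toList_empty, List.nil_append, List.cons_append]
  exact index_eq_bits _ _ _ _ _ _ _ _ _

-- B-side abstractions: the 3-bit column window of a row and the combined 9-bit index
def winB (u : List String) (j : Int) : Int :=
  4 * bitB (PySem.List.pyGetD u (j - 1) "") + 2 * bitB (PySem.List.pyGetD u j "")
    + bitB (PySem.List.pyGetD u (j + 1) "")

def triIdx (up row dn : List String) (j : Int) : Int :=
  winB up j * 64 + winB row j * 8 + winB dn j

def bIdx (image : List (List String)) (i j : Int) : Int :=
  triIdx (PySem.List.pyGetD image (i - 1) []) (PySem.List.pyGetD image i [])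
    (PySem.List.pyGetD image (i + 1) []) j

lemma nested_eq_bIdx (image : List (List String)) (i j : Int) :
    ((((((((0 * 2 + (if cellGet image (i-1) (j-1) = "1" then (1:Int) else 0)) * 2
      + (if cellGet image (i-1) j = "1" then 1 else 0)) * 2
      + (if cellGet image (i-1) (j+1) = "1" then 1 else 0)) * 2
      + (if cellGet image i (j-1) = "1" then 1 else 0)) * 2
      + (if cellGet image i j = "1" then 1 else 0)) * 2
      + (if cellGet image i (j+1) = "1" then 1 else 0)) * 2
      + (if cellGet image (i+1) (j-1) = "1" then 1 else 0)) * 2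
      + (if cellGet image (i+1) j = "1" then 1 else 0)) * 2
      + (if cellGet image (i+1) (j+1) = "1" then 1 else 0)
    = bIdx image i j := by
  simp only [bIdx, triIdx, winB, bitB, cellGet]
  ring

lemma bitB_bounds (s : String) : 0 ≤ bitB s ∧ bitB s ≤ 1 := by
  unfold bitB; split <;> omega

lemma roll_mod8 (a x y z : Int) (hx : 0 ≤ x ∧ x ≤ 1) (hy : 0 ≤ y ∧ y ≤ 1) (hz : 0 ≤ z ∧ z ≤ 1)
    (ha : PySem.Int.mod a 4 = 2 * x + y) :
    PySem.Int.mod (a * 2 + z) 8 = 4 * x + 2 * y + z := by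
  rw [PySem.Int.mod_eq_emod_of_pos (by omega)] at ha
  rw [PySem.Int.mod_eq_emod_of_pos (by omega)]
  omega

lemma roll_mod4 (x y z : Int) (hx : 0 ≤ x ∧ x ≤ 1) (hy : 0 ≤ y ∧ y ≤ 1) (hz : 0 ≤ z ∧ z ≤ 1) :
    PySem.Int.mod (4 * x + 2 * y + z) 4 = 2 * y + z := by
  rw [PySem.Int.mod_eq_emod_of_pos (by omega)]
  omega

-- the rolling fold emits exactly the decoded window values, one per column of [s, e)
lemma roll_spec (decodedata : String) (up row dn : List String) (e s : Int)
    (a b c : Int) (acc : List String)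
    (ha : PySem.Int.mod a 4
      = 2 * bitB (PySem.List.pyGetD up (s - 1) "") + bitB (PySem.List.pyGetD up s ""))
    (hb : PySem.Int.mod b 4
      = 2 * bitB (PySem.List.pyGetD row (s - 1) "") + bitB (PySem.List.pyGetD row s ""))
    (hc : PySem.Int.mod c 4
      = 2 * bitB (PySem.List.pyGetD dn (s - 1) "") + bitB (PySem.List.pyGetD dn s "")) :
    ((PySem.List.pyRange s e).foldl (rollStep decodedata up row dn) (a, b, c, acc)).2.2.2
    = acc ++ (PySem.List.pyRange s e).map (fun j =>
        if PySem.Str.pyGet? decodedata (triIdx up row dn j) = some '#' then "1" else "0") := by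
  by_cases hbe : e ≤ s
  · rw [PySem.List.pyRange_one_eq_nil hbe]
    simp
  · push_neg at hbe
    rw [PySem.List.pyRange_one_cons hbe, List.foldl_cons, List.map_cons]
    have hstep : rollStep decodedata up row dn (a, b, c, acc) s
        = (winB up s, winB row s, winB dn s,
           acc ++ [if PySem.Str.pyGet? decodedata (triIdx up row dn s) = some '#'
                   then "1" else "0"]) := by
      simp only [rollStep, winB, triIdx]
      rw [roll_mod8 _ _ _ _ (bitB_bounds _) (bitB_bounds _) (bitB_bounds _) ha,
          roll_mod8 _ _ _ _ (bitB_bounds _) (bitB_bounds _) (bitB_bounds _) hb,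
          roll_mod8 _ _ _ _ (bitB_bounds _) (bitB_bounds _) (bitB_bounds _) hc]
      rfl
    rw [hstep]
    have hsucc : ∀ u : List String, PySem.Int.mod (winB u s) 4
        = 2 * bitB (PySem.List.pyGetD u (s + 1 - 1) "") + bitB (PySem.List.pyGetD u (s + 1) "") := by
      intro u
      have h1 : (s + 1 - 1 : Int) = s := by ring
      rw [h1]
      unfold winB
      exact roll_mod4 _ _ _ (bitB_bounds _) (bitB_bounds _) (bitB_bounds _)
    rw [roll_spec decodedata up row dn e (s + 1) _ _ _ _ (hsucc up) (hsucc row) (hsucc dn)]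
    rw [List.append_assoc]
    rfl
termination_by (e - s).toNat
decreasing_by omega

-- B, row by row: the per-row body of the single pass
def altRow (image : List (List String)) (decodedata : String) (i : Int) : List String :=
  let rows : Int := PySem.List.len image
  let flip : Bool := PySem.Str.pyGet? decodedata 0 == some '#'
  let row := PySem.List.pyGetD image i []
  let cols : Int := PySem.List.len row
  if ¬ (1 ≤ i ∧ i ≤ rows - 2) ∨ cols < 3 then
    row.map (edgeB flip)
  else
    let up := PySem.List.pyGetD image (i - 1) []
    let dn := PySem.List.pyGetD image (i + 1) []
    let st := (PySem.List.pyRange 1 (cols - 1)).foldl (rollStep decodedata up row dn)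
      (2 * bitB (PySem.List.pyGetD up 0 "") + bitB (PySem.List.pyGetD up 1 ""),
       2 * bitB (PySem.List.pyGetD row 0 "") + bitB (PySem.List.pyGetD row 1 ""),
       2 * bitB (PySem.List.pyGetD dn 0 "") + bitB (PySem.List.pyGetD dn 1 ""),
       [edgeB flip (PySem.List.pyGetD row 0 "")])
    st.2.2.2 ++ [edgeB flip (PySem.List.pyGetD row (-1) "")]

lemma alt_eq_map (image : List (List String)) (decodedata : String) :
    imageenhacement_alt image decodedata
    = (PySem.List.pyRange 0 (PySem.List.len image)).map (altRow image decodedata) := by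
  have h : imageenhacement_alt image decodedata
      = (PySem.List.pyRange 0 (PySem.List.len image)).foldl
          (fun out i => out ++ [altRow image decodedata i]) [] := rfl
  rw [h, PySem.List.foldl_append_singleton_eq_map (altRow image decodedata), List.nil_append]

lemma alt_getD (image : List (List String)) (decodedata : String) (p : Nat)
    (hp : p < image.length) :
    (imageenhacement_alt image decodedata).getD p [] = altRow image decodedata ↑p := by
  rw [alt_eq_map, PySem.List.len_eq, ← PySem.List.pyGetD_natCast]
  exact PySem.List.pyGetD_map_pyRange _ _ _ _ hp

lemma altRow_border (image : List (List String)) (decodedata : String) (i : Int)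
    (h : ¬ (1 ≤ i ∧ i ≤ (image.length : Int) - 2)
       ∨ ((PySem.List.pyGetD image i []).length : Int) < 3) :
    altRow image decodedata i
    = (PySem.List.pyGetD image i []).map (edgeB (PySem.Str.pyGet? decodedata 0 == some '#')) := by
  simp only [altRow, PySem.List.len_eq]
  rw [if_pos h]

lemma altRow_interior (image : List (List String)) (decodedata : String) (i : Int)
    (h1 : 1 ≤ i ∧ i ≤ (image.length : Int) - 2)
    (h3 : 3 ≤ ((PySem.List.pyGetD image i []).length : Int)) :
    altRow image decodedata i
    = edgeB (PySem.Str.pyGet? decodedata 0 == some '#')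
        (PySem.List.pyGetD (PySem.List.pyGetD image i []) 0 "")
      :: ((PySem.List.pyRange 1 (((PySem.List.pyGetD image i []).length : Int) - 1)).map
            (fun j => if PySem.Str.pyGet? decodedata (bIdx image i j) = some '#' then "1" else "0")
          ++ [edgeB (PySem.Str.pyGet? decodedata 0 == some '#')
                (PySem.List.pyGetD (PySem.List.pyGetD image i []) (-1) "")]) := by
  simp only [altRow, PySem.List.len_eq]
  rw [if_neg (by push_neg; exact ⟨h1, by omega⟩)]
  have inv : ∀ u : List String,
      PySem.Int.mod (2 * bitB (PySem.List.pyGetD u 0 "") + bitB (PySem.List.pyGetD u 1 "")) 4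
      = 2 * bitB (PySem.List.pyGetD u ((1 : Int) - 1) "") + bitB (PySem.List.pyGetD u 1 "") := by
    intro u
    have h10 : ((1 : Int) - 1) = 0 := by norm_num
    rw [h10, PySem.Int.mod_eq_emod_of_pos (by omega)]
    have hx := bitB_bounds (PySem.List.pyGetD u 0 "")
    have hy := bitB_bounds (PySem.List.pyGetD u 1 "")
    omega
  rw [roll_spec decodedata (PySem.List.pyGetD image (i - 1) []) (PySem.List.pyGetD image i [])
      (PySem.List.pyGetD image (i + 1) []) (((PySem.List.pyGetD image i []).length : Int) - 1) 1
      _ _ _ _ (inv _) (inv _) (inv _)]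
  rfl

lemma imageenhacement_alt_length (image : List (List String)) (decodedata : String) :
    (imageenhacement_alt image decodedata).length = image.length := by
  rw [alt_eq_map, List.length_map, PySem.List.length_pyRange_one, PySem.List.len_eq]
  omega

lemma imageenhacement_alt_row_length (image : List (List String)) (decodedata : String)
    (p : Nat) (hp : p < image.length) :
    ((imageenhacement_alt image decodedata).getD p []).length = (image.getD p []).length := by
  rw [alt_getD _ _ p hp]
  have hrow : PySem.List.pyGetD image (↑p) [] = image.getD p [] := by simp
  by_cases hint : (1 ≤ (p : Int) ∧ (p : Int) ≤ (image.length : Int) - 2)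
      ∧ 3 ≤ (((PySem.List.pyGetD image (↑p : Int) []).length : Int))
  case pos =>
    rw [altRow_interior _ _ _ hint.1 hint.2]
    simp only [List.length_cons, List.length_append, List.length_map, List.length_nil,
      PySem.List.length_pyRange_one]
    rw [hrow] at hint ⊢
    omega
  case neg =>
    have hcond : ¬ (1 ≤ (p : Int) ∧ (p : Int) ≤ (image.length : Int) - 2)
        ∨ ((PySem.List.pyGetD image (↑p : Int) []).length : Int) < 3 := by
      by_cases hA : (1 ≤ (p : Int) ∧ (p : Int) ≤ (image.length : Int) - 2)
      · right
        by_contra hB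
        exact hint ⟨hA, by omega⟩
      · left; exact hA
    rw [altRow_border _ _ _ hcond, List.length_map, hrow]

lemma imageenhacement_alt_cell (image : List (List String)) (decodedata : String) (p q : Nat)
    (hp : p < image.length) (hq : q < (image.getD p []).length) :
    ((imageenhacement_alt image decodedata).getD p []).getD q ""
    = if 1 ≤ (p : Int) ∧ (p : Int) ≤ (image.length : Int) - 2 ∧ 1 ≤ (q : Int)
          ∧ (q : Int) ≤ ((image.getD p []).length : Int) - 2 then
        (if PySem.Str.pyGet? decodedata (bIdx image p q) = some '#' then "1" else "0")
      else if (PySem.Str.pyGet? decodedata 0 == some '#')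
        then (if (image.getD p []).getD q "" = "0" then "1" else "0")
      else (image.getD p []).getD q "" := by
  rw [alt_getD _ _ p hp]
  have hrow : PySem.List.pyGetD image (↑p : Int) [] = image.getD p [] := by simp
  by_cases hint : (1 ≤ (p : Int) ∧ (p : Int) ≤ (image.length : Int) - 2)
      ∧ 3 ≤ (((PySem.List.pyGetD image (↑p : Int) []).length : Int))
  case pos =>
    have hw3 : 3 ≤ (image.getD p []).length := by
      have := hint.2
      rw [hrow] at this
      omega
    rw [altRow_interior _ _ _ hint.1 hint.2, hrow]
    have hmidlen : ((PySem.List.pyRange 1 (((image.getD p []).length : Int) - 1)).map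
        (fun j => if PySem.Str.pyGet? decodedata (bIdx image ↑p j) = some '#'
                  then "1" else "0")).length = (image.getD p []).length - 2 := by
      rw [List.length_map, PySem.List.length_pyRange_one]
      omega
    cases q with
    | zero =>
      rw [List.getD_cons_zero]
      have hno : ¬ (1 ≤ (p : Int) ∧ (p : Int) ≤ (image.length : Int) - 2
          ∧ 1 ≤ ((0 : Nat) : Int) ∧ ((0 : Nat) : Int) ≤ ((image.getD p []).length : Int) - 2) := by
        rintro ⟨-, -, h, -⟩; omega
      rw [if_neg hno]
      have h0 : PySem.List.pyGetD (image.getD p []) 0 "" = (image.getD p []).getD 0 "" :=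
        PySem.List.pyGetD_zero _ _
      rw [h0]
      by_cases hf : (PySem.Str.pyGet? decodedata 0 == some '#') = true
      · simp [edgeB, hf]
      · simp [edgeB, hf]
    | succ n =>
      rw [List.getD_cons_succ]
      by_cases hn : n < (image.getD p []).length - 2
      · rw [List.getD_append _ _ _ _ (by omega)]
        have hmid : ((PySem.List.pyRange 1 (((image.getD p []).length : Int) - 1)).map
            (fun j => if PySem.Str.pyGet? decodedata (bIdx image ↑p j) = some '#'
                      then "1" else "0")).getD n ""
            = if PySem.Str.pyGet? decodedata (bIdx image ↑p (1 + (n : Int))) = some '#'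
              then "1" else "0" := by
          rw [← PySem.List.pyGetD_natCast]
          exact PySem.List.pyGetD_map_pyRange_one _ _ _ _ _ (by omega)
        rw [hmid]
        have harg : (1 + (n : Int)) = ((n + 1 : Nat) : Int) := by push_cast; ring
        rw [harg]
        have hyes : (1 ≤ (p : Int) ∧ (p : Int) ≤ (image.length : Int) - 2
            ∧ 1 ≤ ((n + 1 : Nat) : Int)
            ∧ ((n + 1 : Nat) : Int) ≤ ((image.getD p []).length : Int) - 2) := by
          obtain ⟨h1, h2⟩ := hint.1
          refine ⟨h1, h2, by push_cast; omega, by push_cast; omega⟩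
        rw [if_pos hyes]
      · have hq' : n + 1 < (image.getD p []).length := hq
        have hn' : n = (image.getD p []).length - 2 := by omega
        rw [List.getD_append_right _ _ _ _ (by omega)]
        rw [hmidlen]
        have hz : n - ((image.getD p []).length - 2) = 0 := by omega
        rw [hz, List.getD_cons_zero]
        have hno : ¬ (1 ≤ (p : Int) ∧ (p : Int) ≤ (image.length : Int) - 2
            ∧ 1 ≤ ((n + 1 : Nat) : Int)
            ∧ ((n + 1 : Nat) : Int) ≤ ((image.getD p []).length : Int) - 2) := by
          rintro ⟨-, -, -, h⟩
          push_cast at h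
          omega
        rw [if_neg hno]
        have hne : image.getD p [] ≠ [] := by
          intro hcon
          rw [hcon] at hw3
          simp at hw3
        have hL : PySem.List.pyGetD (image.getD p []) (-1) ""
            = (image.getD p []).getD (n + 1) "" := by
          rw [pyGetD_neg_one_getD _ _ hne]
          congr 1
          omega
        rw [hL]
        by_cases hf : (PySem.Str.pyGet? decodedata 0 == some '#') = true
        · simp [edgeB, hf]
        · simp [edgeB, hf]
  case neg =>
    have hcond : ¬ (1 ≤ (p : Int) ∧ (p : Int) ≤ (image.length : Int) - 2)
        ∨ ((PySem.List.pyGetD image (↑p : Int) []).length : Int) < 3 := by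
      by_cases hA : (1 ≤ (p : Int) ∧ (p : Int) ≤ (image.length : Int) - 2)
      · right
        by_contra hB
        exact hint ⟨hA, by omega⟩
      · left; exact hA
    rw [altRow_border _ _ _ hcond, hrow]
    have hno : ¬ (1 ≤ (p : Int) ∧ (p : Int) ≤ (image.length : Int) - 2 ∧ 1 ≤ (q : Int)
        ∧ (q : Int) ≤ ((image.getD p []).length : Int) - 2) := by
      rintro ⟨h1, h2, h3, h4⟩
      rcases hcond with hA | hB
      · exact hA ⟨h1, h2⟩
      · rw [hrow] at hB
        omega
    rw [if_neg hno]
    have hmap : ((image.getD p []).map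
        (edgeB (PySem.Str.pyGet? decodedata 0 == some '#'))).getD q ""
        = edgeB (PySem.Str.pyGet? decodedata 0 == some '#') ((image.getD p []).getD q "") := by
      rw [List.getD_eq_getElem _ _ (by rw [List.length_map]; exact hq), List.getElem_map,
          List.getD_eq_getElem _ _ hq]
    rw [hmap]
    by_cases hf : (PySem.Str.pyGet? decodedata 0 == some '#') = true
    · simp [edgeB, hf]
    · simp [edgeB, hf]

lemma interior_val (image : List (List String)) (decodedata : String)
    (hbin : ∀ row ∈ image, ∀ c ∈ row, c = "0" ∨ c = "1")
    (hrect : ∀ row ∈ image, row.length = (image.headD []).length)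
    (p q : Nat) (hp1 : 1 ≤ p) (hp2 : p + 1 < image.length)
    (hq1 : 1 ≤ q) (hq2 : q + 1 < (image.getD p []).length) :
    enhCell image decodedata p q
    = (if PySem.Str.pyGet? decodedata (bIdx image p q) = some '#' then "1" else "0") := by
  have hrowlen : ∀ y : Nat, y < image.length → (image.getD y []).length = (image.getD p []).length := by
    intro y hy
    rw [List.getD_eq_getElem _ _ hy, List.getD_eq_getElem _ _ (by omega),
        hrect _ (List.getElem_mem hy), hrect _ (List.getElem_mem (by omega : p < image.length))]
  have hcell : ∀ (y x : Int), 0 ≤ y → y < (image.length : Int) → 0 ≤ x →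
      x < ((image.getD p []).length : Int) →
      (cellGet image y x = "0" ∨ cellGet image y x = "1") := by
    intro y x hy0 hyl hx0 hxl
    rw [cellGet_nonneg _ _ _ hy0 hx0]
    have hyl' : y.toNat < image.length := by omega
    have hxl' : x.toNat < (image.getD y.toNat []).length := by
      rw [hrowlen y.toNat hyl']
      omega
    rw [List.getD_eq_getElem _ _ hyl']
    have hxl'' : x.toNat < image[y.toNat].length := by
      rw [← List.getD_eq_getElem _ _ hyl']
      exact hxl'
    rw [List.getD_eq_getElem _ _ hxl'']
    exact hbin _ (List.getElem_mem hyl') _ (List.getElem_mem hxl'')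
  unfold enhCell
  simp only [pyRange_three, List.foldl_cons, List.foldl_nil]
  rw [key_index _ _ _ _ _ _ _ _ _
    (hcell _ _ (by omega) (by omega) (by omega) (by omega))
    (hcell _ _ (by omega) (by omega) (by omega) (by omega))
    (hcell _ _ (by omega) (by omega) (by omega) (by omega))
    (hcell _ _ (by omega) (by omega) (by omega) (by omega))
    (hcell _ _ (by omega) (by omega) (by omega) (by omega))
    (hcell _ _ (by omega) (by omega) (by omega) (by omega))
    (hcell _ _ (by omega) (by omega) (by omega) (by omega))
    (hcell _ _ (by omega) (by omega) (by omega) (by omega))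
    (hcell _ _ (by omega) (by omega) (by omega) (by omega))]
  rw [nested_eq_bIdx]

lemma ext2 (X Y : List (List String)) (h1 : X.length = Y.length)
    (h2 : ∀ p : Nat, p < X.length → (X.getD p []).length = (Y.getD p []).length)
    (h3 : ∀ p q : Nat, p < X.length → q < (X.getD p []).length →
      (X.getD p []).getD q "" = (Y.getD p []).getD q "") : X = Y := by
  apply List.ext_getElem h1
  intro p hp1 hp2
  have hrl : X[p].length = Y[p].length := by
    rw [← List.getD_eq_getElem _ _ hp1, ← List.getD_eq_getElem _ _ hp2]
    exact h2 p hp1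
  apply List.ext_getElem hrl
  intro q hq1 hq2
  have hq1' : q < (X.getD p []).length := by rw [List.getD_eq_getElem _ _ hp1]; exact hq1
  have hq2' : q < (Y.getD p []).length := by rw [List.getD_eq_getElem _ _ hp2]; exact hq2
  have e1 : X[p] = X.getD p [] := (List.getD_eq_getElem _ _ hp1).symm
  have e2 : Y[p] = Y.getD p [] := (List.getD_eq_getElem _ _ hp2).symm
  rw [← List.getD_eq_getElem _ _ hq1, ← List.getD_eq_getElem _ _ hq2, e1, e2]
  exact h3 p q hp1 hq1'

lemma hash_iff (decodedata : String) :
    PySem.Str.pyGet? decodedata 0 = some '#' ↔ decodedata.toList.headD ' ' = '#' := by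
  have h0 : PySem.Str.pyGet? decodedata 0 = decodedata.toList[0]? := by
    have : ((0 : Nat) : Int) = (0 : Int) := rfl
    rw [← this, PySem.Str.pyGet?_natCast]
  rw [h0]
  cases h : decodedata.toList with
  | nil => simp
  | cons c cs =>
    simp only [List.getElem?_cons_zero, List.headD_cons]
    constructor
    · intro h'; exact (Option.some_inj.mp h')
    · intro h'; rw [h']

lemma mem_middle (image : List (List String)) (p : Nat) (h1 : 1 ≤ p) (h2 : p + 1 < image.length) :
    image.getD p [] ∈ (image.drop 1).dropLast := by
  have hidx : p - 1 < (image.drop 1).dropLast.length := by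
    rw [List.length_dropLast, List.length_drop]
    omega
  have hidx2 : p - 1 < (image.drop 1).length := by
    rw [List.length_drop]
    omega
  have heq : (image.drop 1).dropLast[p-1] = image.getD p [] := by
    rw [List.getElem_dropLast, List.getElem_drop]
    have h1p : 1 + (p - 1) = p := by omega
    rw [List.getD_eq_getElem _ _ (by omega : p < image.length)]
    congr 1
  rw [← heq]
  exact List.getElem_mem _

theorem A_eq_B (image : List (List String)) (decodedata : String)
    (h2 : (3 ≤ image.length ∧ ∃ row ∈ (image.drop 1).dropLast, 3 ≤ row.length) →
      ((∀ row ∈ image, ∀ c ∈ row, c = "0" ∨ c = "1") ∧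
       (∀ row ∈ image, row.length = (image.headD []).length) ∧
       512 ≤ decodedata.toList.length))
    (h3 : decodedata.toList.headD ' ' = '#' →
      (image ≠ [] ∧ (∀ row ∈ image, row.length = (image.headD []).length) ∧
       (3 ≤ image.length → 1 ≤ (image.headD []).length)))
    (hnD : ¬ (decodedata.toList.headD ' ' = '#' ∧
      ((image.length = 1 ∧ 1 ≤ (image.headD []).length) ∨
       ((image.headD []).length = 1 ∧ 3 ≤ image.length)))) :
    imageenhacement image decodedata = imageenhacement_alt image decodedata := by
  simp only [imageenhacement]
  rw [copy_phase_eq]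
  rw [PySem.List.foldl_congr_mem _ _
    (fun ni (i : Int) => PySem.List.pySetD ni i
      ((PySem.List.pyRange 1 (PySem.List.len (PySem.List.pyGetD image i []) - 1)).foldl
        (fun r j => PySem.List.pySetD r j (enhCell image decodedata i j))
        (PySem.List.pyGetD ni i []))) image
    (fun acc i hi => foldl_cellSet_fixed_row_all _ acc i
      (by have := PySem.List.mem_pyRange_one.mp hi; omega)
      (fun j => enhCell image decodedata i j))]
  set m1 := (PySem.List.pyRange 1 (PySem.List.len image - 1)).foldl
      (fun ni (i : Int) => PySem.List.pySetD ni i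
        ((PySem.List.pyRange 1 (PySem.List.len (PySem.List.pyGetD image i []) - 1)).foldl
          (fun r j => PySem.List.pySetD r j (enhCell image decodedata i j))
          (PySem.List.pyGetD ni i []))) image with hm1def
  have hm1len : m1.length = image.length := by
    rw [hm1def]
    exact length_foldl_pySetD _ (fun i => i) _ image
  have hm1row : ∀ p : Nat, m1.getD p []
      = if 1 ≤ (p:Int) ∧ (p:Int) < PySem.List.len image - 1 ∧ p < image.length
        then ((PySem.List.pyRange 1 (PySem.List.len (PySem.List.pyGetD image (p:Int) []) - 1)).foldl
          (fun r j => PySem.List.pySetD r j (enhCell image decodedata (p:Int) j)) (image.getD p []))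
        else image.getD p [] := by
    intro p
    rw [hm1def]
    exact foldl_rowset_pyRange_getD image 1 (PySem.List.len image - 1) (by omega)
      (fun i r => (PySem.List.pyRange 1 (PySem.List.len (PySem.List.pyGetD image i []) - 1)).foldl
        (fun r j => PySem.List.pySetD r j (enhCell image decodedata i j)) r) p
  have hrowF_len : ∀ (p : Nat) (r : List String),
      ((PySem.List.pyRange 1 (PySem.List.len (PySem.List.pyGetD image (p:Int) []) - 1)).foldl
        (fun r j => PySem.List.pySetD r j (enhCell image decodedata (p:Int) j)) r).length = r.length := by
    intro p r
    exact length_foldl_pySetD _ (fun j => j) _ r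
  have hlenp : ∀ p : Nat, PySem.List.len (PySem.List.pyGetD image (p:Int) [])
      = ((image.getD p []).length : Int) := by
    intro p
    rw [pyGetD_nonneg_getD _ _ _ (by omega : (0:Int) ≤ (p:Int)), PySem.List.len_eq, Int.toNat_natCast]
  have hm1rowlen : ∀ p : Nat, (m1.getD p []).length = (image.getD p []).length := by
    intro p
    rw [hm1row p]
    split_ifs with h
    · exact hrowF_len p _
    · rfl
  have hm1cell : ∀ p q : Nat, (m1.getD p []).getD q ""
      = if 1 ≤ (p:Int) ∧ (p:Int) < (image.length:Int) - 1 ∧ 1 ≤ (q:Int)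
            ∧ (q:Int) < ((image.getD p []).length:Int) - 1
        then enhCell image decodedata p q
        else (image.getD p []).getD q "" := by
    intro p q
    rw [hm1row p]
    by_cases hp : 1 ≤ (p:Int) ∧ (p:Int) < PySem.List.len image - 1 ∧ p < image.length
    · rw [if_pos hp,
        foldl_pySetD_pyRange_getD (image.getD p []) 1
          (PySem.List.len (PySem.List.pyGetD image (p:Int) []) - 1) (by omega)
          (fun j => enhCell image decodedata (p:Int) j) q, hlenp p]
      rw [PySem.List.len_eq] at hp
      have hiff : (1 ≤ (q:Int) ∧ (q:Int) < ((image.getD p []).length:Int) - 1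
            ∧ q < (image.getD p []).length)
          ↔ (1 ≤ (p:Int) ∧ (p:Int) < (image.length:Int) - 1 ∧ 1 ≤ (q:Int)
            ∧ (q:Int) < ((image.getD p []).length:Int) - 1) := by
        constructor
        · rintro ⟨a, b, c⟩
          exact ⟨by omega, by omega, a, b⟩
        · rintro ⟨-, -, a, b⟩
          exact ⟨a, b, by omega⟩
      rw [if_congr hiff rfl rfl]
    · rw [if_neg hp]
      rw [PySem.List.len_eq] at hp
      have hno : ¬ (1 ≤ (p:Int) ∧ (p:Int) < (image.length:Int) - 1 ∧ 1 ≤ (q:Int)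
          ∧ (q:Int) < ((image.getD p []).length:Int) - 1) := by
        rintro ⟨a, b, -, -⟩
        exact hp ⟨a, b, by omega⟩
      rw [if_neg hno]
  by_cases hash : PySem.Str.pyGet? decodedata 0 = some '#'
  case neg =>
    rw [if_neg hash]
    have hflip : (PySem.Str.pyGet? decodedata 0 == some '#') = false := beq_eq_false_iff_ne.mpr hash
    apply ext2 _ _ (by rw [hm1len, imageenhacement_alt_length])
    · intro p hp
      have hp' : p < image.length := by rw [← hm1len]; exact hp
      rw [hm1rowlen p, imageenhacement_alt_row_length _ _ p hp']
    · intro p q hp hq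
      have hp' : p < image.length := by rw [← hm1len]; exact hp
      have hq' : q < (image.getD p []).length := by rw [← hm1rowlen p]; exact hq
      rw [hm1cell p q, imageenhacement_alt_cell image decodedata p q hp' hq', hflip]
      simp only [Bool.false_eq_true, if_false]
      by_cases hint : 1 ≤ (p:Int) ∧ (p:Int) < (image.length:Int) - 1 ∧ 1 ≤ (q:Int)
          ∧ (q:Int) < ((image.getD p []).length:Int) - 1
      · rw [if_pos hint, if_pos (by
          obtain ⟨a, b, c, d⟩ := hint
          exact ⟨a, by omega, c, by omega⟩)]
        obtain ⟨hbin, hrect, -⟩ := h2 ⟨by omega, image.getD p [],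
          mem_middle image p (by omega) (by omega), by omega⟩
        exact interior_val image decodedata hbin hrect p q (by omega) (by omega) (by omega) (by omega)
      · rw [if_neg hint, if_neg (by
          rintro ⟨a, b, c, d⟩
          exact hint ⟨a, by omega, c, by omega⟩)]
  case pos =>
    rw [if_pos hash]
    obtain ⟨hne, hrect, h3w⟩ := h3 ((hash_iff decodedata).mp hash)
    have hflip : (PySem.Str.pyGet? decodedata 0 == some '#') = true := by
      rw [beq_iff_eq]
      exact hash
    have hrows1 : 1 ≤ image.length := List.length_pos_iff.mpr hne
    set w := (image.headD []).length with hwdef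
    have hrectD : ∀ p : Nat, p < image.length → (image.getD p []).length = w := by
      intro p hp
      rw [List.getD_eq_getElem _ _ hp]
      exact hrect _ (List.getElem_mem hp)
    have hb : PySem.List.len (PySem.List.pyGetD m1 0 []) = ((w : Nat) : Int) := by
      have h0 : PySem.List.pyGetD m1 0 [] = m1.getD 0 [] := by
        have : ((0:Nat) : Int) = (0 : Int) := rfl
        rw [← this, pyGetD_nonneg_getD _ _ _ (by omega), Int.toNat_natCast]
      rw [h0, PySem.List.len_eq, hm1rowlen 0, hrectD 0 (by omega)]
    simp only [flip_step]
    rw [hb]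
    by_cases hw0 : w = 0
    · have hr2 : image.length ≤ 2 := by
        by_contra hcon
        have := h3w (by omega)
        omega
      rw [hw0]
      rw [show ((0:Nat) : Int) = (0:Int) from rfl, PySem.List.pyRange_one_eq_nil (by omega)]
      simp only [List.foldl_nil]
      rw [PySem.List.pyRange_one_eq_nil (by rw [PySem.List.len_eq, hm1len]; omega)]
      simp only [List.foldl_nil]
      apply ext2 _ _ (by rw [hm1len, imageenhacement_alt_length])
      · intro p hp
        have hp' : p < image.length := by rw [← hm1len]; exact hp
        rw [hm1rowlen p, imageenhacement_alt_row_length _ _ p hp']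
      · intro p q hp hq
        have hp' : p < image.length := by rw [← hm1len]; exact hp
        have hq' : q < (image.getD p []).length := by rw [← hm1rowlen p]; exact hq
        rw [hrectD p hp'] at hq'
        omega
    · have hw1 : 1 ≤ w := by omega
      have hrows2 : 2 ≤ image.length := by
        rcases Nat.lt_or_ge image.length 2 with hcase | hcase
        · exact absurd ⟨(hash_iff decodedata).mp hash, Or.inl ⟨by omega, by omega⟩⟩ hnD
        · exact hcase
      obtain ⟨hT1, hT2, hT3⟩ := flipTB m1 (by rw [hm1len]; exact hrows2) 0 ((w:Nat) : Int) (le_refl 0)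
      set m2 := (PySem.List.pyRange 0 ((w:Nat) : Int)).foldl (fun ni i =>
        cellSet (cellSet ni 0 i (flipS (cellGet ni 0 i))) (-1) i
          (flipS (cellGet (cellSet ni 0 i (flipS (cellGet ni 0 i))) (-1) i))) m1 with hm2def
      have hm2len : m2.length = image.length := by rw [hT1, hm1len]
      have hm2rowlen : ∀ p : Nat, (m2.getD p []).length = (image.getD p []).length := by
        intro p
        rw [hT2 p, hm1rowlen p]
      rw [show PySem.List.len m2 - 1 = (image.length : Int) - 1 from by
        rw [PySem.List.len_eq, hm2len]]
      by_cases hr3 : 3 ≤ image.length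
      · have hw2 : 2 ≤ w := by
          rcases Nat.lt_or_ge w 2 with hcase | hcase
          · exact absurd ⟨(hash_iff decodedata).mp hash, Or.inr ⟨by omega, hr3⟩⟩ hnD
          · exact hcase
        have hm2rows : ∀ p : Nat, p < m2.length → (m2.getD p []).length = w := by
          intro p hp
          rw [hm2rowlen p, hrectD p (by rw [← hm2len]; exact hp)]
        obtain ⟨hL1, hL2, hL3⟩ := flipLR m2 w hw2 hm2rows 1 ((image.length : Int) - 1) (by omega)
        apply ext2 _ _ (by rw [hL1, hm2len, imageenhacement_alt_length])
        · intro p hp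
          have hp' : p < image.length := by rw [← hm2len, ← hL1]; exact hp
          rw [hL2 p, hm2rowlen p, imageenhacement_alt_row_length _ _ p hp']
        · intro p q hp hq
          have hp' : p < image.length := by rw [← hm2len, ← hL1]; exact hp
          have hq' : q < (image.getD p []).length := by rw [← hm2rowlen p, ← hL2 p]; exact hq
          have hqw : q < w := by rw [← hrectD p hp']; exact hq'
          rw [hL3 p q, hm2len, hT3 p q, hm1len, hm1cell p q, hm1rowlen p,
              imageenhacement_alt_cell image decodedata p q hp' hq', hflip, hrectD p hp']
          simp only [if_true]
          by_cases hpb : p = 0 ∨ p = image.length - 1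
          · have hLno : ¬ ((1 ≤ (p:Int) ∧ (p:Int) < (image.length:Int) - 1 ∧ p < image.length)
                ∧ ((q:Nat) = 0 ∨ q = w - 1)) := by
              rintro ⟨⟨ha, hbb, -⟩, -⟩
              rcases hpb with h | h <;> omega
            have hTyes : ((p = 0 ∨ p = image.length - 1) ∧ (0:Int) ≤ (q:Int) ∧ (q:Int) < ((w:Nat):Int) ∧ q < w) := by
              exact ⟨hpb, by omega, by omega, hqw⟩
            have hM1no : ¬ (1 ≤ (p:Int) ∧ (p:Int) < (image.length:Int) - 1 ∧ 1 ≤ (q:Int)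
                ∧ (q:Int) < ((w:Nat):Int) - 1) := by
              rintro ⟨ha, hbb, -, -⟩
              rcases hpb with h | h <;> omega
            have hBno : ¬ (1 ≤ (p:Int) ∧ (p:Int) ≤ (image.length:Int) - 2 ∧ 1 ≤ (q:Int)
                ∧ (q:Int) ≤ ((w:Nat):Int) - 2) := by
              rintro ⟨ha, hbb, -, -⟩
              rcases hpb with h | h <;> omega
            rw [if_neg hLno, if_pos hTyes, if_neg hM1no, if_neg hBno]
            simp only [flipS]
          · have hp1 : 1 ≤ p := by omega
            have hp2 : p < image.length - 1 := by omega
            have hTno : ¬ ((p = 0 ∨ p = image.length - 1) ∧ (0:Int) ≤ (q:Int) ∧ (q:Int) < ((w:Nat):Int) ∧ q < w) := by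
              rintro ⟨hcase, -⟩
              rcases hcase with h | h <;> omega
            rw [if_neg hTno]
            by_cases hqb : (q:Nat) = 0 ∨ q = w - 1
            · have hLyes : ((1 ≤ (p:Int) ∧ (p:Int) < (image.length:Int) - 1 ∧ p < image.length)
                  ∧ ((q:Nat) = 0 ∨ q = w - 1)) := ⟨⟨by omega, by omega, hp'⟩, hqb⟩
              have hM1no : ¬ (1 ≤ (p:Int) ∧ (p:Int) < (image.length:Int) - 1 ∧ 1 ≤ (q:Int)
                  ∧ (q:Int) < ((w:Nat):Int) - 1) := by
                rintro ⟨-, -, ha, hbb⟩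
                rcases hqb with h | h <;> omega
              have hBno : ¬ (1 ≤ (p:Int) ∧ (p:Int) ≤ (image.length:Int) - 2 ∧ 1 ≤ (q:Int)
                  ∧ (q:Int) ≤ ((w:Nat):Int) - 2) := by
                rintro ⟨-, -, ha, hbb⟩
                rcases hqb with h | h <;> omega
              rw [if_pos hLyes, if_neg hM1no, if_neg hBno]
              simp only [flipS]
            · have hq1 : 1 ≤ q := by omega
              have hq2 : q < w - 1 := by omega
              have hLno : ¬ ((1 ≤ (p:Int) ∧ (p:Int) < (image.length:Int) - 1 ∧ p < image.length)
                  ∧ ((q:Nat) = 0 ∨ q = w - 1)) := by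
                rintro ⟨-, hcase⟩
                rcases hcase with h | h <;> omega
              have hM1yes : (1 ≤ (p:Int) ∧ (p:Int) < (image.length:Int) - 1 ∧ 1 ≤ (q:Int)
                  ∧ (q:Int) < ((w:Nat):Int) - 1) := ⟨by omega, by omega, by omega, by omega⟩
              have hByes : (1 ≤ (p:Int) ∧ (p:Int) ≤ (image.length:Int) - 2 ∧ 1 ≤ (q:Int)
                  ∧ (q:Int) ≤ ((w:Nat):Int) - 2) := ⟨by omega, by omega, by omega, by omega⟩
              rw [if_neg hLno, if_pos hM1yes, if_pos hByes]
              obtain ⟨hbin, -, -⟩ := h2 ⟨by omega, image.getD p [],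
                mem_middle image p (by omega) (by omega), by rw [hrectD p hp']; omega⟩
              exact interior_val image decodedata hbin hrect p q (by omega) (by omega) (by omega)
                (by rw [hrectD p hp']; omega)
      · have hr2 : image.length = 2 := by omega
        rw [PySem.List.pyRange_one_eq_nil (by omega)]
        simp only [List.foldl_nil]
        apply ext2 _ _ (by rw [hm2len, imageenhacement_alt_length])
        · intro p hp
          have hp' : p < image.length := by rw [← hm2len]; exact hp
          rw [hm2rowlen p, imageenhacement_alt_row_length _ _ p hp']
        · intro p q hp hq
          have hp' : p < image.length := by rw [← hm2len]; exact hp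
          have hq' : q < (image.getD p []).length := by rw [← hm2rowlen p]; exact hq
          have hqw : q < w := by rw [← hrectD p hp']; exact hq'
          rw [hT3 p q, hm1len, hm1cell p q, hm1rowlen p,
              imageenhacement_alt_cell image decodedata p q hp' hq', hflip, hrectD p hp']
          simp only [if_true]
          have hpb : p = 0 ∨ p = image.length - 1 := by omega
          have hTyes : ((p = 0 ∨ p = image.length - 1) ∧ (0:Int) ≤ (q:Int) ∧ (q:Int) < ((w:Nat):Int) ∧ q < w) :=
            ⟨hpb, by omega, by omega, hqw⟩
          have hM1no : ¬ (1 ≤ (p:Int) ∧ (p:Int) < (image.length:Int) - 1 ∧ 1 ≤ (q:Int)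
              ∧ (q:Int) < ((w:Nat):Int) - 1) := by
            rintro ⟨ha, hbb, -, -⟩
            omega
          have hBno : ¬ (1 ≤ (p:Int) ∧ (p:Int) ≤ (image.length:Int) - 2 ∧ 1 ≤ (q:Int)
              ∧ (q:Int) ≤ ((w:Nat):Int) - 2) := by
            rintro ⟨ha, hbb, -, -⟩
            omega
          rw [if_pos hTyes, if_neg hM1no, if_neg hBno]
          simp only [flipS]

-- ===== tightness: inside D_ the two results differ at a border cell =====

lemma foldl_fix {α β} (f : α → β → α) (l : List β) (x : α)
    (h : ∀ b ∈ l, ∀ a, f a b = a) : l.foldl f x = x := by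
  induction l generalizing x with
  | nil => rfl
  | cons b l ih =>
    rw [List.foldl_cons, h b (List.mem_cons_self), ih]
    intro b' hb' a
    exact h b' (List.mem_cons_of_mem _ hb') a

lemma headD_eq_getD (l : List (List String)) : l.headD [] = l.getD 0 [] := by
  cases l <;> rfl

lemma flipS_ne (c : String) : flipS (flipS c) ≠ flipS c := by
  unfold flipS
  by_cases h : c = "0" <;> simp [h]

-- single-row variant of flipTB: both paired writes land on row 0, so each
-- column in range is flipped twice
lemma flipTB1 (m : List (List String)) (hm : m.length = 1) (a e : Int) (ha : 0 ≤ a) :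
    ((PySem.List.pyRange a e).foldl (fun ni i =>
        cellSet (cellSet ni 0 i (flipS (cellGet ni 0 i))) (-1) i
          (flipS (cellGet (cellSet ni 0 i (flipS (cellGet ni 0 i))) (-1) i))) m).length = m.length ∧
    (∀ p : Nat, (((PySem.List.pyRange a e).foldl (fun ni i =>
        cellSet (cellSet ni 0 i (flipS (cellGet ni 0 i))) (-1) i
          (flipS (cellGet (cellSet ni 0 i (flipS (cellGet ni 0 i))) (-1) i))) m).getD p []).length
      = (m.getD p []).length) ∧
    (∀ q : Nat, (((PySem.List.pyRange a e).foldl (fun ni i =>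
        cellSet (cellSet ni 0 i (flipS (cellGet ni 0 i))) (-1) i
          (flipS (cellGet (cellSet ni 0 i (flipS (cellGet ni 0 i))) (-1) i))) m).getD 0 []).getD q ""
      = if a ≤ (q : Int) ∧ (q : Int) < e ∧ q < (m.getD 0 []).length
        then flipS (flipS ((m.getD 0 []).getD q "")) else (m.getD 0 []).getD q "") := by
  by_cases hbe : e ≤ a
  · rw [PySem.List.pyRange_one_eq_nil hbe]
    refine ⟨rfl, fun p => rfl, fun q => ?_⟩
    have : ¬ (a ≤ (q : Int) ∧ (q : Int) < e ∧ q < (m.getD 0 []).length) := by omega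
    rw [if_neg this]
    rfl
  · push_neg at hbe
    rw [PySem.List.pyRange_one_cons hbe, List.foldl_cons]
    have hmne : m ≠ [] := List.ne_nil_of_length_pos (by omega)
    have hget0 : PySem.List.pyGetD m 0 [] = m.getD 0 [] := PySem.List.pyGetD_zero _ _
    set r := m.getD 0 [] with hrdef
    have hset0self : m.set 0 r = m := by
      rw [hrdef, List.getD_eq_getElem _ _ (by omega : 0 < m.length)]
      exact List.set_getElem_self (by omega)
    by_cases hin : a.toNat < r.length
    case neg =>
      have hc1 : ∀ v, cellSet m 0 a v = m := by
        intro v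
        unfold cellSet
        rw [hget0, pySetD_oob r a v (by omega),
            PySem.List.pySetD_of_nonneg _ _ le_rfl]
        exact hset0self
      have hgL : PySem.List.pyGetD m (-1) [] = r := by
        rw [pyGetD_neg_one_getD _ _ hmne, hm, hrdef]
      have hcL : ∀ v, cellSet m (-1) a v = m := by
        intro v
        unfold cellSet
        rw [hgL, pySetD_oob r a v (by omega), pySetD_neg_one _ _ hmne, hm]
        exact hset0self
      rw [hc1 _, hcL _]
      obtain ⟨ih1, ih2, ih3⟩ := flipTB1 m hm (a + 1) e (by omega)
      refine ⟨ih1, ih2, fun q => ?_⟩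
      rw [ih3 q]
      have hiff : (a + 1 ≤ (q : Int) ∧ (q : Int) < e ∧ q < (m.getD 0 []).length)
          ↔ (a ≤ (q : Int) ∧ (q : Int) < e ∧ q < (m.getD 0 []).length) := by
        rw [← hrdef]
        omega
      rw [if_congr hiff rfl rfl]
    case pos =>
      have e1 : cellSet m 0 a (flipS (cellGet m 0 a))
          = m.set 0 (r.set a.toNat (flipS (r.getD a.toNat ""))) := by
        rw [cellGet_nonneg _ _ _ le_rfl ha, cellSet_nonneg _ _ _ _ le_rfl ha, hrdef]
        norm_num
      set r1 := r.set a.toNat (flipS (r.getD a.toNat "")) with hr1def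
      set n1 := m.set 0 r1 with hn1def
      have hn1len : n1.length = m.length := by rw [hn1def, List.length_set]
      have hn1ne : n1 ≠ [] := List.ne_nil_of_length_pos (by omega)
      have e2 : n1.getD (n1.length - 1) [] = r1 := by
        rw [hn1len, hm, hn1def, set_getD, if_pos ⟨rfl, by omega⟩]
      have hr1len : r1.length = r.length := by rw [hr1def, List.length_set]
      have e3 : cellGet n1 (-1) a = flipS (r.getD a.toNat "") := by
        rw [cellGet_neg_one _ _ ha hn1ne, e2, hr1def, set_getD, if_pos ⟨rfl, hin⟩]
      have e4 : cellSet n1 (-1) a (flipS (cellGet n1 (-1) a))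
          = m.set 0 (r.set a.toNat (flipS (flipS (r.getD a.toNat "")))) := by
        rw [cellSet_neg_one _ _ _ ha hn1ne, e3, e2, hn1len, hm, hn1def, List.set_set,
            hr1def, List.set_set]
      rw [e1, e4]
      set m' := m.set 0 (r.set a.toNat (flipS (flipS (r.getD a.toNat "")))) with hm'def
      have hm'len : m'.length = m.length := by rw [hm'def, List.length_set]
      have hrow0 : m'.getD 0 [] = r.set a.toNat (flipS (flipS (r.getD a.toNat ""))) := by
        rw [hm'def, set_getD, if_pos ⟨rfl, by omega⟩]
      have hrowp : ∀ p : Nat, (m'.getD p []).length = (m.getD p []).length := by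
        intro p
        rw [hm'def, set_getD]
        split_ifs with h1
        · rw [List.length_set, ← h1.1, ← hrdef]
        · rfl
      obtain ⟨ih1, ih2, ih3⟩ := flipTB1 m' (by omega) (a + 1) e (by omega)
      refine ⟨by rw [ih1, hm'len], fun p => by rw [ih2 p, hrowp p], fun q => ?_⟩
      rw [ih3 q, hrow0]
      simp only [List.length_set]
      rw [set_getD]
      by_cases hq1 : (q : Int) = a
      · have hqa : a.toNat = q := by omega
        have hc1 : ¬ (a + 1 ≤ (q : Int) ∧ (q : Int) < e ∧ q < r.length) := by omega
        have hc2 : (a ≤ (q : Int) ∧ (q : Int) < e ∧ q < r.length) := ⟨by omega, by omega, by omega⟩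
        rw [if_neg hc1, if_pos ⟨hqa, by omega⟩, if_pos hc2, hqa]
      · have hc3 : ¬ (a.toNat = q ∧ q < r.length) := by omega
        rw [if_neg hc3]
        have hiff : (a + 1 ≤ (q : Int) ∧ (q : Int) < e ∧ q < r.length)
            ↔ (a ≤ (q : Int) ∧ (q : Int) < e ∧ q < r.length) := by omega
        rw [if_congr hiff rfl rfl]
termination_by (e - a).toNat
decreasing_by all_goals omega

-- single-column variant of flipLR: the [0] and [-1] writes of each row coincide,
-- so each row in range has its only cell flipped twice
lemma flipLR1 (m : List (List String)) (hrows : ∀ p : Nat, p < m.length → (m.getD p []).length = 1)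
    (a e : Int) (ha : 0 ≤ a) :
    ((PySem.List.pyRange a e).foldl (fun ni i =>
        cellSet (cellSet ni i 0 (flipS (cellGet ni i 0))) i (-1)
          (flipS (cellGet (cellSet ni i 0 (flipS (cellGet ni i 0))) i (-1)))) m).length = m.length ∧
    (∀ p : Nat, (((PySem.List.pyRange a e).foldl (fun ni i =>
        cellSet (cellSet ni i 0 (flipS (cellGet ni i 0))) i (-1)
          (flipS (cellGet (cellSet ni i 0 (flipS (cellGet ni i 0))) i (-1)))) m).getD p []).length
      = (m.getD p []).length) ∧
    (∀ p q : Nat, (((PySem.List.pyRange a e).foldl (fun ni i =>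
        cellSet (cellSet ni i 0 (flipS (cellGet ni i 0))) i (-1)
          (flipS (cellGet (cellSet ni i 0 (flipS (cellGet ni i 0))) i (-1)))) m).getD p []).getD q ""
      = if (a ≤ (p : Int) ∧ (p : Int) < e ∧ p < m.length) ∧ q = 0
        then flipS (flipS ((m.getD p []).getD q "")) else (m.getD p []).getD q "") := by
  by_cases hbe : e ≤ a
  · rw [PySem.List.pyRange_one_eq_nil hbe]
    refine ⟨rfl, fun p => rfl, fun p q => ?_⟩
    have : ¬ ((a ≤ (p : Int) ∧ (p : Int) < e ∧ p < m.length) ∧ q = 0) := by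
      rintro ⟨⟨h1, h2, -⟩, -⟩; omega
    rw [if_neg this]
    rfl
  · push_neg at hbe
    rw [PySem.List.pyRange_one_cons hbe, List.foldl_cons]
    by_cases hain : a.toNat < m.length
    case neg =>
      have hoob : ∀ (mm : List (List String)) (v : String) (j : Int), mm.length = m.length →
          cellSet mm a j v = mm := by
        intro mm v j hlen
        unfold cellSet
        exact pySetD_oob _ _ _ (by omega)
      rw [hoob m _ _ rfl, hoob m _ _ rfl]
      obtain ⟨ih1, ih2, ih3⟩ := flipLR1 m hrows (a + 1) e (by omega)
      refine ⟨ih1, ih2, fun p q => ?_⟩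
      rw [ih3 p q]
      have hiff : ((a + 1 ≤ (p : Int) ∧ (p : Int) < e ∧ p < m.length) ∧ q = 0)
          ↔ ((a ≤ (p : Int) ∧ (p : Int) < e ∧ p < m.length) ∧ q = 0) := by
        constructor
        · rintro ⟨⟨h1, h2, h3⟩, h4⟩; exact ⟨⟨by omega, h2, h3⟩, h4⟩
        · rintro ⟨⟨h1, h2, h3⟩, h4⟩; exact ⟨⟨by omega, h2, h3⟩, h4⟩
      rw [if_congr hiff rfl rfl]
    case pos =>
      have hr : (m.getD a.toNat []).length = 1 := hrows a.toNat hain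
      set r := m.getD a.toNat [] with hrdef
      have hrne : r ≠ [] := List.ne_nil_of_length_pos (by omega)
      have e1 : cellSet m a 0 (flipS (cellGet m a 0))
          = m.set a.toNat (r.set 0 (flipS (r.getD 0 ""))) := by
        rw [cellGet_nonneg _ _ _ ha (le_refl 0), cellSet_nonneg _ _ _ _ ha (le_refl 0), hrdef]
        norm_num
      set r1 := r.set 0 (flipS (r.getD 0 "")) with hr1def
      set n1 := m.set a.toNat r1 with hn1def
      have hr1len : r1.length = 1 := by rw [hr1def, List.length_set, hr]
      have hr1ne : r1 ≠ [] := List.ne_nil_of_length_pos (by omega)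
      have hn1len : n1.length = m.length := by rw [hn1def, List.length_set]
      have e2a : PySem.List.pyGetD n1 a [] = r1 := by
        rw [pyGetD_nonneg_getD _ _ _ ha, hn1def, set_getD, if_pos ⟨rfl, hain⟩]
      have e2 : cellGet n1 a (-1) = flipS (r.getD 0 "") := by
        unfold cellGet
        rw [e2a, pyGetD_neg_one_getD _ _ hr1ne, hr1len, hr1def, set_getD,
            if_pos ⟨rfl, by omega⟩]
      have e3 : cellSet n1 a (-1) (flipS (cellGet n1 a (-1)))
          = m.set a.toNat (r.set 0 (flipS (flipS (r.getD 0 "")))) := by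
        unfold cellSet
        rw [e2, e2a, PySem.List.pySetD_of_nonneg _ _ ha, pySetD_neg_one _ _ hr1ne, hr1len,
            hn1def, List.set_set, hr1def, List.set_set]
      rw [e1, e3]
      set m' := m.set a.toNat (r.set 0 (flipS (flipS (r.getD 0 "")))) with hm'def
      have hm'len : m'.length = m.length := by rw [hm'def, List.length_set]
      have hrowp : ∀ p : Nat, m'.getD p []
          = if a.toNat = p ∧ p < m.length then r.set 0 (flipS (flipS (r.getD 0 "")))
            else m.getD p [] := by
        intro p
        rw [hm'def, set_getD]
      have hrowlen : ∀ p : Nat, (m'.getD p []).length = (m.getD p []).length := by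
        intro p
        rw [hrowp p]
        split_ifs with h1
        · rw [List.length_set, ← h1.1, ← hrdef]
        · rfl
      have hrows' : ∀ p : Nat, p < m'.length → (m'.getD p []).length = 1 := by
        intro p hp
        rw [hrowlen p]
        exact hrows p (by omega)
      obtain ⟨ih1, ih2, ih3⟩ := flipLR1 m' hrows' (a + 1) e (by omega)
      refine ⟨by rw [ih1, hm'len], fun p => by rw [ih2 p, hrowlen p], fun p q => ?_⟩
      rw [ih3 p q, hm'len, hrowp p]
      by_cases hpa : a.toNat = p ∧ p < m.length
      · have hc1 : ¬ ((a + 1 ≤ (p : Int) ∧ (p : Int) < e ∧ p < m.length) ∧ q = 0) := by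
          rintro ⟨⟨h1, -, -⟩, -⟩; omega
        rw [if_neg hc1, if_pos hpa, set_getD]
        have hrp : m.getD p [] = r := by rw [hrdef, hpa.1]
        rw [hrp]
        by_cases hq0 : q = 0
        · have hc2 : ((a ≤ (p : Int) ∧ (p : Int) < e ∧ p < m.length) ∧ q = 0) :=
            ⟨⟨by omega, by omega, hpa.2⟩, hq0⟩
          rw [if_pos hc2, if_pos ⟨by omega, by omega⟩, hq0]
        · have hc2 : ¬ ((a ≤ (p : Int) ∧ (p : Int) < e ∧ p < m.length) ∧ q = 0) := by
            rintro ⟨-, h⟩; exact hq0 h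
          rw [if_neg hc2, if_neg (by omega)]
      · rw [if_neg hpa]
        have hiff : ((a + 1 ≤ (p : Int) ∧ (p : Int) < e ∧ p < m.length) ∧ q = 0)
            ↔ ((a ≤ (p : Int) ∧ (p : Int) < e ∧ p < m.length) ∧ q = 0) := by
          constructor
          · rintro ⟨⟨h1, h2, h3⟩, h4⟩; exact ⟨⟨by omega, h2, h3⟩, h4⟩
          · rintro ⟨⟨h1, h2, h3⟩, h4⟩
            have : ¬ (a.toNat = p) := fun h => hpa ⟨h, h3⟩
            exact ⟨⟨by omega, h2, h3⟩, h4⟩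
        rw [if_congr hiff rfl rfl]
termination_by (e - a).toNat
decreasing_by all_goals omega

-- ===== VERDICT (by name: the statements are the Claim_ definitions above) =====
theorem imageenhacement_spec : Claim_unchanged_imageenhacement := by
  intro image decodedata _ hpre hnD
  obtain ⟨-, h2, h3⟩ := hpre
  exact A_eq_B image decodedata h2 h3 hnD

theorem imageenhacement_changed : Claim_changed_imageenhacement := by
  unfold Claim_changed_imageenhacement
  decide

theorem imageenhacement_tight : Claim_exact_imageenhacement := by
  unfold Claim_exact_imageenhacement
  intro image decodedata hdom hpre hD heq
  obtain ⟨hdne, h2, h3⟩ := hpre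
  obtain ⟨hhash, hcase⟩ := hD
  obtain ⟨hne, hrect, h3w⟩ := h3 hhash
  have hash : PySem.Str.pyGet? decodedata 0 = some '#' := (hash_iff decodedata).mpr hhash
  have hflip : (PySem.Str.pyGet? decodedata 0 == some '#') = true := by
    rw [beq_iff_eq]; exact hash
  have hrows1 : 1 ≤ image.length := List.length_pos_iff.mpr hne
  have hrectD : ∀ p : Nat, p < image.length → (image.getD p []).length = (image.headD []).length := by
    intro p hp
    rw [List.getD_eq_getElem _ _ hp]
    exact hrect _ (List.getElem_mem hp)
  have hg0 : PySem.List.pyGetD image 0 [] = image.getD 0 [] := PySem.List.pyGetD_zero _ _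
  rcases hcase with ⟨hr1, hw1⟩ | ⟨hw1, hr3⟩
  · -- one row: A double-flips every pixel of the single row, B flips once
    rw [headD_eq_getD] at hw1
    have hA : ((imageenhacement image decodedata).getD 0 []).getD 0 ""
        = flipS (flipS ((image.getD 0 []).getD 0 "")) := by
      simp only [imageenhacement]
      rw [copy_phase_eq]
      rw [PySem.List.pyRange_one_eq_nil (by rw [PySem.List.len_eq]; omega), List.foldl_nil]
      rw [if_pos hash]
      simp only [flip_step]
      obtain ⟨t1, t2, t3⟩ := flipTB1 image hr1 0
        (PySem.List.len (PySem.List.pyGetD image 0 [])) le_rfl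
      set m2 := (PySem.List.pyRange 0
          (PySem.List.len (PySem.List.pyGetD image 0 []))).foldl (fun ni i =>
        cellSet (cellSet ni 0 i (flipS (cellGet ni 0 i))) (-1) i
          (flipS (cellGet (cellSet ni 0 i (flipS (cellGet ni 0 i))) (-1) i))) image with hm2def
      rw [PySem.List.pyRange_one_eq_nil (by rw [PySem.List.len_eq, t1, hr1]; omega),
          List.foldl_nil]
      rw [t3 0]
      rw [if_pos ⟨by omega, by rw [hg0, PySem.List.len_eq]; push_cast; omega, by omega⟩]
    have hB : ((imageenhacement_alt image decodedata).getD 0 []).getD 0 ""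
        = flipS ((image.getD 0 []).getD 0 "") := by
      rw [imageenhacement_alt_cell image decodedata 0 0 (by omega) (by omega)]
      rw [if_neg (by rintro ⟨h1, -, -, -⟩; omega), hflip]
      simp only [if_true]
      rfl
    rw [heq, hB] at hA
    exact flipS_ne _ hA.symm
  · -- one column, at least three rows: row 1 is double-flipped by A, flipped once by B
    rw [headD_eq_getD] at hw1
    have hrows : ∀ p : Nat, p < image.length → (image.getD p []).length = 1 := by
      intro p hp
      rw [hrectD p hp, headD_eq_getD, hw1]
    have hA : ((imageenhacement image decodedata).getD 1 []).getD 0 ""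
        = flipS (flipS ((image.getD 1 []).getD 0 "")) := by
      simp only [imageenhacement]
      rw [copy_phase_eq]
      rw [foldl_fix (fun ni (i : Int) =>
          (PySem.List.pyRange 1 (PySem.List.len (PySem.List.pyGetD image i []) - 1)).foldl
            (fun ni j => cellSet ni i j (enhCell image decodedata i j)) ni)
        (PySem.List.pyRange 1 (PySem.List.len image - 1)) image (by
          intro i hi acc
          dsimp only
          have hmem := PySem.List.mem_pyRange_one.mp hi
          rw [PySem.List.len_eq] at hmem
          have hi0 : (0 : Int) ≤ i := by omega
          have hlen : PySem.List.len (PySem.List.pyGetD image i []) = 1 := by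
            rw [pyGetD_nonneg_getD _ _ _ hi0, PySem.List.len_eq, hrows i.toNat (by omega)]
            simp
          rw [hlen]
          rw [PySem.List.pyRange_one_eq_nil (by omega), List.foldl_nil])]
      rw [if_pos hash]
      simp only [flip_step]
      obtain ⟨t1, t2, t3⟩ := flipTB image (by omega) 0
        (PySem.List.len (PySem.List.pyGetD image 0 [])) le_rfl
      set m2 := (PySem.List.pyRange 0
          (PySem.List.len (PySem.List.pyGetD image 0 []))).foldl (fun ni i =>
        cellSet (cellSet ni 0 i (flipS (cellGet ni 0 i))) (-1) i
          (flipS (cellGet (cellSet ni 0 i (flipS (cellGet ni 0 i))) (-1) i))) image with hm2def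
      obtain ⟨l1, l2, l3⟩ := flipLR1 m2 (by
        intro p hp
        rw [t2 p]
        rw [t1] at hp
        exact hrows p hp) 1 (PySem.List.len m2 - 1) (by omega)
      rw [l3 1 0, t3 1 0]
      have hTno : ¬ ((1 = 0 ∨ 1 = image.length - 1)
          ∧ (0 : Int) ≤ ((0 : Nat) : Int)
          ∧ ((0 : Nat) : Int) < PySem.List.len (PySem.List.pyGetD image 0 [])
          ∧ 0 < (image.getD 1 []).length) := by
        rintro ⟨hc, -⟩
        rcases hc with h | h <;> omega
      rw [if_neg hTno]
      have hLyes : ((1 ≤ ((1 : Nat) : Int)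
          ∧ ((1 : Nat) : Int) < PySem.List.len m2 - 1
          ∧ 1 < m2.length) ∧ (0 : Nat) = 0) := by
        refine ⟨⟨by norm_num, ?_, ?_⟩, rfl⟩
        · rw [PySem.List.len_eq, t1]
          push_cast
          omega
        · rw [t1]
          omega
      rw [if_pos hLyes]
    have hB : ((imageenhacement_alt image decodedata).getD 1 []).getD 0 ""
        = flipS ((image.getD 1 []).getD 0 "") := by
      rw [imageenhacement_alt_cell image decodedata 1 0 (by omega)
        (by rw [hrows 1 (by omega)]; omega)]
      rw [if_neg (by rintro ⟨-, -, h, -⟩; omega), hflip]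
      simp only [if_true]
      rfl
    rw [heq, hB] at hA
    exact flipS_ne _ hA.symm
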